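-- pv_equiv track=rewrite | github.com/rhelmot/nx-glabvartrie | src/glabvartrie/database.py | _refined_color_classes
-- ===== SOURCE A (Python) =====
-- from collections import Counter, defaultdict
-- from typing import Any, Callable, Generic, Hashable, Iterator, TypeAlias, TypeVar
--
-- def _refined_color_classes(
--     adjacency: tuple[tuple[bool, ...], ...],
--     initial_keys: tuple[Hashable, ...] | None = None,
-- ) -> tuple[tuple[int, ...], ...]:
--     size = len(adjacency)
--     if initial_keys is None:
--         colors = tuple(
--             hash(
--                 (
--                     sum(adjacency[position]),
--                     sum(adjacency[other][position] for other in range(size)),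
--                     adjacency[position][position],
--                 )
--             )
--             for position in range(size)
--         )
--     else:
--         color_ids: dict[Hashable, int] = {}
--         colors = tuple(color_ids.setdefault(key, len(color_ids)) for key in initial_keys)
--
--     while True:
--         signatures = [
--             (
--                 colors[position],
--                 tuple(sorted(colors[other] for other in range(size) if adjacency[position][other])),
--                 tuple(sorted(colors[other] for other in range(size) if adjacency[other][position])),
--             )
--             for position in range(size)
--         ]
--         signature_ids: dict[tuple[Any, ...], int] = {}
--         next_colors_list: list[int] = []
--         for signature in signatures:
--             next_colors_list.append(signature_ids.setdefault(signature, len(signature_ids)))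
--         next_colors = tuple(next_colors_list)
--         if next_colors == colors:
--             break
--         colors = next_colors
--
--     classes: defaultdict[int, list[int]] = defaultdict(list)
--     for position, color in enumerate(colors):
--         classes[color].append(position)
--     return tuple(tuple(class_members) for _, class_members in sorted(classes.items(), key=lambda item: item[0]))
-- ===== SOURCE B (Python) =====
-- def _refined_color_classes(adjacency, initial_keys=None):
--     size = len(adjacency)
--     if initial_keys is None:
--         keys = [
--             hash(
--                 (
--                     sum(adjacency[position]),
--                     sum(adjacency[other][position] for other in range(size)),
--                     adjacency[position][position],
--                 )
--             )
--             for position in range(size)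
--         ]
--     else:
--         keys = list(initial_keys)[:size]
--
--     # initial partition: positions grouped by key, blocks in first-occurrence order
--     groups = {}
--     for position, key in enumerate(keys):
--         groups.setdefault(key, []).append(position)
--     partition = list(groups.values())
--
--     # partition refinement: repeatedly split every block by its members'
--     # in/out edge counts into each current block, until no block splits
--     changed = True
--     while changed:
--         changed = False
--         block_of = [0] * size
--         for index, block in enumerate(partition):
--             for member in block:
--                 block_of[member] = index
--         block_count = len(partition)
--         new_partition = []
--         for block in partition:
--             splits = {}
--             for member in block:
--                 out_counts = [0] * block_count
--                 in_counts = [0] * block_count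
--                 for other in range(size):
--                     if adjacency[member][other]:
--                         out_counts[block_of[other]] += 1
--                     if adjacency[other][member]:
--                         in_counts[block_of[other]] += 1
--                 signature = (tuple(out_counts), tuple(in_counts))
--                 splits.setdefault(signature, []).append(member)
--             if len(splits) > 1:
--                 changed = True
--             new_partition.extend(splits.values())
--         partition = new_partition
--
--     # classes ordered by smallest member (= A's final color-id order)
--     return tuple(tuple(block) for block in sorted(partition, key=lambda block: block[0]))
-- ===== Notes on version B (the rewrite author's own statement) =====
-- stated objective: alternative
-- what changed: B replaces A's global color-array fixed point (recolor every vertex each round from sorted neighbor-color tuples via a relabelling dict, then group colors into classes and sort the dict items at the end) by partition refinement: it maintains the list of classes itself, each round splitting every block by its members' in/out edge-count vectors into the current blocks, stops when no block splits, and emits the blocks sorted by their smallest member; no color array, relabelling dict or final grouping pass exists in B.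
import Mathlib
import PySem

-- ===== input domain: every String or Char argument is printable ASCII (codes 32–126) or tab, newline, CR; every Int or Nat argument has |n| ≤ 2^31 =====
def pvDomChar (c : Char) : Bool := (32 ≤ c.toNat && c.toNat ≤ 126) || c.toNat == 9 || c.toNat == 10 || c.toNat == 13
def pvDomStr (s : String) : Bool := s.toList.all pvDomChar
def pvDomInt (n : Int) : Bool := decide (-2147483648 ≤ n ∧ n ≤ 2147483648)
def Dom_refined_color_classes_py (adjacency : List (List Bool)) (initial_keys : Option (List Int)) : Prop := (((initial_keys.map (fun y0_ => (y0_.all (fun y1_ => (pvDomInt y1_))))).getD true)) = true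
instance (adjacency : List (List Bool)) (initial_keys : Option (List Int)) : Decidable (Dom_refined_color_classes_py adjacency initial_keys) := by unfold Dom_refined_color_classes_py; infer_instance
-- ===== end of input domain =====

-- B is a partition-refinement reformulation of A's 1-WL fixed point: it maintains the list of
-- classes itself and splits each block by its members' in/out edge-count vectors into the current
-- blocks until no block splits, emitting the blocks sorted by smallest member; same return value
-- as A on every input Pre_ admits.

-- ===== PORT A =====

-- CPython's deterministic tuple hash (xxhash-style, 64-bit build) for the triple
-- (out-degree, in-degree, loop-flag): small non-negative ints hash to themselves.  Exact for 0 ≤ a,b < 2^61.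
def pvHashLane (acc lane : UInt64) : UInt64 :=
  (((acc + lane * 14029467366897019727) <<< 31) ||| ((acc + lane * 14029467366897019727) >>> 33)) * 11400714785074694791

def pvHashTriple (a b : Nat) (c : Bool) : Int :=
  let acc := pvHashLane (pvHashLane (pvHashLane 2870177450012600261 (UInt64.ofNat a)) (UInt64.ofNat b)) (if c then 1 else 0)
  let acc := acc + ((3 : UInt64) ^^^ ((2870177450012600261 : UInt64) ^^^ (3527539 : UInt64)))
  let acc := if acc = (18446744073709551615 : UInt64) then (1546275796 : UInt64) else acc
  let v : Int := (acc.toNat : Int)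
  if (2 : Int) ^ 63 ≤ v then v - 2 ^ 64 else v

-- `colors = tuple(hash((sum(row), in_degree, row[position])) for position in range(size))`
-- (identical code in A and in B, so the helper is shared)
def pvInitColors (adjacency : List (List Bool)) : List Int :=
  let size := adjacency.length
  (List.range size).map (fun position =>
    let row := adjacency.getD position []
    pvHashTriple (row.count true)
      (((List.range size).map (fun other => (adjacency.getD other []).getD position false)).count true)
      (row.getD position false))

-- `[ids.setdefault(x, len(ids)) for x in xs]`, also returning the final dict
def pvRelabelGoD {α : Type} [BEq α] (d : PySem.Dict α Int) : List α → List Int × PySem.Dict α Int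
  | [] => ([], d)
  | x :: xs =>
    let v : Int := (d.get? x).getD (d.size : Int)
    let r := pvRelabelGoD (d.setdefault x (d.size : Int)) xs
    (v :: r.1, r.2)

def pvRelabel {α : Type} [BEq α] (xs : List α) : List Int :=
  (pvRelabelGoD PySem.Dict.empty xs).1

-- A's per-position signature: (color, sorted out-neighbor colors, sorted in-neighbor colors)
def pvSigA (adjacency : List (List Bool)) (size : Nat) (colors : List Int) (p : Nat) :
    Int × List Int × List Int :=
  (colors.getD p 0,
   PySem.List.sorted (((List.range size).filter (fun o => (adjacency.getD p []).getD o false)).map (fun o => colors.getD o 0)) (fun x => x),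
   PySem.List.sorted (((List.range size).filter (fun o => (adjacency.getD o []).getD p false)).map (fun o => colors.getD o 0)) (fun x => x))

-- one iteration of A's `while True` body: signatures, then `setdefault` relabelling
def pvStepA (adjacency : List (List Bool)) (size : Nat) (colors : List Int) : List Int :=
  pvRelabel ((List.range size).map (pvSigA adjacency size colors))

-- A's `while True` loop; the fuel `size+3` only makes it total (1-WL stabilises in ≤ size+2 rounds)
def pvALoop (adjacency : List (List Bool)) (size : Nat) : Nat → List Int → List Int
  | 0, colors => colors
  | fuel + 1, colors =>
    let next := pvStepA adjacency size colors
    if next = colors then colors else pvALoop adjacency size fuel next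

-- `enumerate(colors)` as (color, position) pairs
def pvEnum (colors : List Int) : List (Int × Int) :=
  colors.zipIdx.map (fun p => (p.1, (p.2 : Int)))

-- `classes[color].append(position)` then `sorted(classes.items(), key=lambda item: item[0])`
def pvExtractA (colors : List Int) : List (List Int) :=
  let classes := (pvEnum colors).foldl (fun d p => d.modify p.1 [] (fun x => x ++ [p.2])) PySem.Dict.empty
  (PySem.List.sorted classes.items (fun it => it.1)).map (fun it => it.2)

def refined_color_classes_py (adjacency : List (List Bool)) (initial_keys : Option (List Int)) : List (List Int) :=
  let size := adjacency.length
  let colors := match initial_keys with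
    | none => pvInitColors adjacency
    | some ks => pvRelabel ks
  pvExtractA (pvALoop adjacency size (size + 3) colors)

-- ===== PORT B =====

-- `keys = [hash(...)]` (same code as A's none-branch) / `list(initial_keys)[:size]`
def pvKeysB (adjacency : List (List Bool)) (initial_keys : Option (List Int)) : List Int :=
  match initial_keys with
  | none => pvInitColors adjacency
  | some ks => PySem.List.slice ks none (some ((adjacency.length : Nat) : Int))

-- `groups.setdefault(key, []).append(position)` over `enumerate(keys)`, then `list(groups.values())`
def pvInitPartB (keys : List Int) : List (List Int) :=
  ((pvEnum keys).foldl (fun d p => d.modify p.1 [] (fun x => x ++ [p.2])) PySem.Dict.empty).values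

-- `block_of[member] = index` for every member of every block
def pvBlockOf (size : Nat) (partition : List (List Int)) : List Int :=
  partition.zipIdx.foldl
    (fun bo bi => bi.1.foldl (fun bo2 member => PySem.List.pySetD bo2 member ((bi.2 : Nat) : Int)) bo)
    (List.replicate size (0 : Int))

-- `cnt[c] += 1`
def pvInc (l : List Int) (c : Int) : List Int :=
  PySem.List.pySetD l c (PySem.List.pyGetD l c 0 + 1)

-- B's per-member signature: (out-count vector, in-count vector) over the current blocks
def pvSigB (adjacency : List (List Bool)) (size block_count : Nat) (block_of : List Int) (member : Int) :
    List Int × List Int :=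
  let row := PySem.List.pyGetD adjacency member []
  (List.range size).foldl
    (fun (st : List Int × List Int) other =>
      (if row.getD other false then pvInc st.1 (block_of.getD other 0) else st.1,
       if PySem.List.pyGetD (adjacency.getD other []) member false then pvInc st.2 (block_of.getD other 0) else st.2))
    (List.replicate block_count 0, List.replicate block_count 0)

-- one pass of the `while changed` body: split every block by signature
def pvRoundB (adjacency : List (List Bool)) (size : Nat) (partition : List (List Int)) :
    List (List Int) × Bool :=
  let block_of := pvBlockOf size partition
  let block_count := partition.length
  partition.foldl
    (fun (st : List (List Int) × Bool) block =>
      let splits : PySem.Dict (List Int × List Int) (List Int) := block.foldl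
        (fun d member => d.modify (pvSigB adjacency size block_count block_of member) [] (fun x => x ++ [member]))
        PySem.Dict.empty
      (st.1 ++ splits.values, st.2 || decide (1 < splits.size)))
    ([], false)

-- `while changed` loop; the fuel `size+3` only makes it total (≤ size rounds can change the partition)
def pvBLoop (adjacency : List (List Bool)) (size : Nat) : Nat → List (List Int) → List (List Int)
  | 0, partition => partition
  | fuel + 1, partition =>
    let r := pvRoundB adjacency size partition
    if r.2 then pvBLoop adjacency size fuel r.1 else r.1

def refined_color_classes_py_alt (adjacency : List (List Bool)) (initial_keys : Option (List Int)) : List (List Int) :=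
  let size := adjacency.length
  let keys := pvKeysB adjacency initial_keys
  PySem.List.sorted (pvBLoop adjacency size (size + 3) (pvInitPartB keys))
    (fun block => PySem.List.pyGetD block 0 0)

-- ===== PRECONDITION & SPEC =====

-- Pre_ excludes exactly the inputs on which A raises IndexError: an adjacency row shorter than
-- len(adjacency), or initial_keys shorter than len(adjacency) (the loop then reads colors[position]
-- past the end).  A returns normally on everything else.
def Pre_refined_color_classes_py (adjacency : List (List Bool)) (initial_keys : Option (List Int)) : Prop :=
  (∀ row ∈ adjacency, adjacency.length ≤ row.length) ∧
  (∀ ks, initial_keys = some ks → adjacency.length ≤ ks.length)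
instance (adjacency : List (List Bool)) (initial_keys : Option (List Int)) : Decidable (Pre_refined_color_classes_py adjacency initial_keys) := by unfold Pre_refined_color_classes_py; infer_instance

def pvWitness_refined_color_classes_py : List (List Bool) × Option (List Int) := ([[true, false], [false, false]], none)

def Spec_refined_color_classes_py (adjacency : List (List Bool)) (initial_keys : Option (List Int)) (out : List (List Int)) : Prop := out = refined_color_classes_py_alt adjacency initial_keys
instance (adjacency : List (List Bool)) (initial_keys : Option (List Int)) (out : List (List Int)) : Decidable (Spec_refined_color_classes_py adjacency initial_keys out) := by unfold Spec_refined_color_classes_py; infer_instance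

-- ===== CLAIM (what is proved, stated in full; the proofs are below) =====
def Claim_equal_refined_color_classes_py : Prop := ∀ (adjacency : List (List Bool)) (initial_keys : Option (List Int)), Dom_refined_color_classes_py adjacency initial_keys → Pre_refined_color_classes_py adjacency initial_keys → Spec_refined_color_classes_py adjacency initial_keys (refined_color_classes_py adjacency initial_keys)

-- ===== LEMMAS AND PROOFS =====

-- ---- the `setdefault(x, len(d))` relabelling loop: its dict is always `pvEnc F` for the
-- ---- first-occurrence list F, and the emitted ids are indices into F ----

def pvEnc {α : Type} [BEq α] (F : List α) : PySem.Dict α Int :=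
  ⟨F.zipIdx.map (fun p => (p.1, (p.2 : Int)))⟩

theorem pvEnc_find? {α : Type} [BEq α] [LawfulBEq α] (x : α) :
    ∀ (F : List α) (n : Nat),
      List.find? (fun p => p.1 == x) (F.zipIdx n |>.map (fun p => (p.1, (p.2 : Int))))
        = (List.idxOf? x F).map (fun i => (x, ((n + i : Nat) : Int))) := by
  intro F
  induction F with
  | nil => intro n; simp
  | cons a F ih =>
    intro n
    rw [List.zipIdx_cons]
    simp only [List.map_cons, List.find?_cons, List.idxOf?_cons]
    by_cases h : a = x
    · subst h; simp
    · have hb : (a == x) = false := by simp [h]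
      simp only [hb]
      rw [ih (n+1)]
      cases hx : List.idxOf? x F with
      | none => simp
      | some i => simp; omega

theorem pvIdxOf?_eq {α : Type} [BEq α] [LawfulBEq α] (F : List α) (x : α) :
    List.idxOf? x F = if x ∈ F then some (List.idxOf x F) else none := by
  induction F with
  | nil => simp
  | cons a F ih =>
    rw [List.idxOf?_cons, List.idxOf_cons]
    by_cases h : a = x
    · subst h; simp
    · have hb : (a == x) = false := by simp [h]
      simp only [hb, ih, List.mem_cons]
      by_cases hm : x ∈ F <;> simp [hm, Ne.symm h]

theorem pvEnc_get? {α : Type} [BEq α] [LawfulBEq α] (F : List α) (x : α) :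
    (pvEnc F).get? x = if x ∈ F then some ((List.idxOf x F : Nat) : Int) else none := by
  have h0 : (pvEnc F).get? x
      = (List.find? (fun p => p.1 == x) (F.zipIdx.map (fun p => (p.1, (p.2 : Int))))).map (fun p => p.2) := rfl
  rw [h0, pvEnc_find? x F 0, pvIdxOf?_eq]
  by_cases hm : x ∈ F <;> simp [hm]

theorem pvEnc_size {α : Type} [BEq α] (F : List α) : (pvEnc F).size = F.length := by
  simp [pvEnc, PySem.Dict.size]

theorem pvEnc_contains {α : Type} [BEq α] [LawfulBEq α] (F : List α) (x : α) :
    (pvEnc F).contains x = decide (x ∈ F) := by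
  rw [PySem.Dict.contains_eq_isSome_get?, pvEnc_get?]
  by_cases hm : x ∈ F <;> simp [hm]

theorem pvAdd_eq {α : Type} [BEq α] [LawfulBEq α] (F : List α) (x : α) :
    PySem.Set.add F x = if x ∈ F then F else F ++ [x] := by
  simp [PySem.Set.add]

theorem pvSet_update_append {α : Type} [BEq α] :
    ∀ (l F : List α), ∃ ext, PySem.Set.update F l = F ++ ext := by
  intro l
  induction l with
  | nil => intro F; exact ⟨[], by simp [PySem.Set.update]⟩
  | cons x l ih =>
    intro F
    show ∃ ext, PySem.Set.update (PySem.Set.add F x) l = F ++ ext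
    by_cases h : F.contains x
    · simpa [PySem.Set.add, h] using ih F
    · obtain ⟨ext, he⟩ := ih (F ++ [x])
      exact ⟨[x] ++ ext, by simp [PySem.Set.add, h, he]⟩

theorem pvRelabelGoD_spec {α : Type} [BEq α] [LawfulBEq α] :
    ∀ (xs F : List α), F.Nodup →
      pvRelabelGoD (pvEnc F) xs
        = (xs.map (fun x => ((PySem.Set.update F xs).idxOf x : Int)), pvEnc (PySem.Set.update F xs)) := by
  intro xs
  induction xs with
  | nil => intro F h; simp [pvRelabelGoD, PySem.Set.update]
  | cons x xs ih =>
    intro F hF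
    have hupd : PySem.Set.update F (x :: xs) = PySem.Set.update (PySem.Set.add F x) xs := rfl
    rw [pvRelabelGoD]
    by_cases hm : x ∈ F
    · have hsd : (pvEnc F).setdefault x ((pvEnc F).size : Int) = pvEnc F :=
        PySem.Dict.setdefault_of_contains _ _ (by simp [pvEnc_contains, hm])
      rw [hsd, ih F hF]
      have hadd : PySem.Set.add F x = F := by rw [pvAdd_eq, if_pos hm]
      rw [hupd, hadd]
      obtain ⟨ext, hext⟩ := pvSet_update_append xs F
      have hidx : List.idxOf x (PySem.Set.update F xs) = List.idxOf x F := by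
        rw [hext, List.idxOf_append, if_pos hm]
      simp [pvEnc_get?, hm, hidx]
    · have hsd : (pvEnc F).setdefault x ((pvEnc F).size : Int) = pvEnc (F ++ [x]) := by
        rw [PySem.Dict.setdefault_of_not_contains _ _ (by simp [pvEnc_contains, hm])]
        apply PySem.Dict.ext
        rw [PySem.Dict.items_insert_of_not_contains _ _ (by simp [pvEnc_contains, hm])]
        show (pvEnc F).items ++ [(x, ((pvEnc F).size : Int))] = (pvEnc (F ++ [x])).items
        simp [pvEnc, PySem.Dict.size, List.zipIdx_append]
      rw [hsd, ih (F ++ [x]) (by simp [List.nodup_append, hF]; intro a ha hax; exact hm (hax ▸ ha))]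
      have hadd : PySem.Set.add F x = F ++ [x] := by rw [pvAdd_eq, if_neg hm]
      rw [hupd, hadd]
      obtain ⟨ext, hext⟩ := pvSet_update_append xs (F ++ [x])
      have hidx : List.idxOf x (PySem.Set.update (F ++ [x]) xs) = F.length := by
        rw [hext, List.idxOf_append, if_pos (by simp), List.idxOf_append, if_neg hm]
        simp
      simp [pvEnc_get?, hm, hidx, pvEnc_size]

-- the id assigned to x is the index of x in the first-occurrence dedup of xs
def pvG {α : Type} [BEq α] (xs : List α) : α → Int := fun x => ((PySem.Set.ofList xs).idxOf x : Int)

theorem pvEnc_nil {α : Type} [BEq α] : (pvEnc ([] : List α)) = PySem.Dict.empty := rfl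

theorem pvOfList_eq_update {α : Type} [BEq α] (xs : List α) :
    PySem.Set.ofList xs = PySem.Set.update [] xs := rfl

theorem pvRelabelGoD_empty {α : Type} [BEq α] [LawfulBEq α] (xs : List α) :
    pvRelabelGoD PySem.Dict.empty xs = (xs.map (pvG xs), pvEnc (PySem.Set.ofList xs)) := by
  rw [← pvEnc_nil, pvRelabelGoD_spec xs [] List.nodup_nil, pvOfList_eq_update]
  rfl

theorem pvRelabel_spec {α : Type} [BEq α] [LawfulBEq α] (xs : List α) :
    pvRelabel xs = xs.map (pvG xs) := by
  rw [pvRelabel, pvRelabelGoD_empty]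

theorem pvRelabel_length {α : Type} [BEq α] [LawfulBEq α] (xs : List α) :
    (pvRelabel xs).length = xs.length := by
  rw [pvRelabel_spec, List.length_map]

-- ---- injective recodings ----

theorem pvOfList_map {α β : Type} [BEq α] [LawfulBEq α] [BEq β] [LawfulBEq β] (f : α → β) :
    ∀ (xs S : List α), (∀ x ∈ S ++ xs, ∀ y ∈ S ++ xs, f x = f y → x = y) →
      PySem.Set.update (S.map f) (xs.map f) = (PySem.Set.update S xs).map f := by
  intro xs
  induction xs with
  | nil => intro S h; simp [PySem.Set.update]
  | cons x xs ih =>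
    intro S h
    show PySem.Set.update (PySem.Set.add (S.map f) (f x)) (xs.map f) = (PySem.Set.update (PySem.Set.add S x) xs).map f
    have hadd : PySem.Set.add (S.map f) (f x) = (PySem.Set.add S x).map f := by
      simp only [PySem.Set.add]
      by_cases hm : x ∈ S
      · rw [if_pos (by rw [PySem.Set.contains_iff]; exact List.mem_map.mpr ⟨x, hm, rfl⟩),
          if_pos (by rw [PySem.Set.contains_iff]; exact hm)]
      · rw [if_neg (by
            rw [PySem.Set.contains_iff]
            intro hcm
            obtain ⟨a, ha, hfa⟩ := List.mem_map.mp hcm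
            exact hm ((h a (by simp [ha]) x (by simp) hfa) ▸ ha)),
          if_neg (by rw [PySem.Set.contains_iff]; exact hm)]
        simp
    rw [hadd, ih]
    have conv : ∀ c : α, c ∈ (PySem.Set.add S x) ++ xs → c ∈ S ++ x :: xs := by
      intro c hc
      rcases List.mem_append.mp hc with h1 | h2
      · by_cases hxS : x ∈ S
        · rw [pvAdd_eq, if_pos hxS] at h1; exact List.mem_append.mpr (Or.inl h1)
        · rw [pvAdd_eq, if_neg hxS] at h1
          rcases List.mem_append.mp h1 with h3 | h3
          · exact List.mem_append.mpr (Or.inl h3)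
          · simp only [List.mem_singleton] at h3; simp [h3]
      · simp [h2]
    exact fun a ha b hb hf => h a (conv a ha) b (conv b hb) hf

theorem pvIdxOf_map_injOn {α β : Type} [BEq α] [LawfulBEq α] [BEq β] [LawfulBEq β]
    (f : α → β) (x : α) :
    ∀ (F : List α), (∀ y ∈ F, f y = f x → y = x) →
      List.idxOf (f x) (F.map f) = List.idxOf x F := by
  intro F
  induction F with
  | nil => intro _; simp
  | cons a F ih =>
    intro h
    rw [List.map_cons, List.idxOf_cons, List.idxOf_cons]
    by_cases ha : a = x
    · subst ha; simp
    · have h1 : (a == x) = false := by simp [ha]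
      have h2 : (f a == f x) = false := by
        simp only [beq_eq_false_iff_ne, ne_eq]
        intro hfa; exact ha (h a (by simp) hfa)
      rw [h1, h2, ih (fun y hy => h y (by simp [hy]))]

theorem pvRelabel_map {α β : Type} [BEq α] [LawfulBEq α] [BEq β] [LawfulBEq β]
    (f : α → β) (xs : List α)
    (hinj : ∀ x ∈ xs, ∀ y ∈ xs, f x = f y → x = y) :
    pvRelabel (xs.map f) = pvRelabel xs := by
  rw [pvRelabel_spec, pvRelabel_spec, List.map_map]
  apply List.map_congr_left
  intro x hx
  show pvG (xs.map f) (f x) = pvG xs x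
  unfold pvG
  have hof : PySem.Set.ofList (xs.map f) = (PySem.Set.ofList xs).map f := by
    rw [pvOfList_eq_update, pvOfList_eq_update, ← List.map_nil (f := f)]
    exact pvOfList_map f xs [] (by simpa using hinj)
  rw [hof, pvIdxOf_map_injOn]
  intro y hy hfy
  exact hinj y ((PySem.Set.mem_ofList xs y).mp hy) x hx hfy

theorem pvCount_map_injOn {α β : Type} [BEq α] [LawfulBEq α] [BEq β] [LawfulBEq β]
    (f : α → β) (c : α) :
    ∀ (l : List α), (∀ y ∈ l, f y = f c → y = c) →
      List.count (f c) (l.map f) = List.count c l := by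
  intro l
  induction l with
  | nil => intro _; simp
  | cons a l ih =>
    intro h
    rw [List.map_cons, List.count_cons, List.count_cons, ih (fun y hy => h y (by simp [hy]))]
    by_cases ha : a = c
    · subst ha; simp
    · have : ¬ f a = f c := fun hfa => ha (h a (by simp) hfa)
      simp [ha, this]

theorem pvG_inj {α : Type} [BEq α] [LawfulBEq α] {colors : List α} {c c' : α}
    (hc : c ∈ colors) (hc' : c' ∈ colors)
    (h : pvG colors c = pvG colors c') : c = c' := by
  have hm : c ∈ PySem.Set.ofList colors := (PySem.Set.mem_ofList colors c).mpr hc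
  have hm' : c' ∈ PySem.Set.ofList colors := (PySem.Set.mem_ofList colors c').mpr hc'
  have h2 : List.idxOf c (PySem.Set.ofList colors) = List.idxOf c' (PySem.Set.ofList colors) := by
    unfold pvG at h; exact_mod_cast h
  have h3 := List.getElem_idxOf (List.idxOf_lt_length_iff.mpr hm)
  have h4 := List.getElem_idxOf (List.idxOf_lt_length_iff.mpr hm')
  rw [← h3, ← h4]
  simp [h2]

theorem pvGetD_map (g : Int → Int) (l : List Int) (p : Nat) (h : p < l.length) :
    (l.map g).getD p 0 = g (l.getD p 0) := by
  rw [List.getD_eq_getElem?_getD, List.getD_eq_getElem?_getD, List.getElem?_map,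
    List.getElem?_eq_getElem h]
  simp

theorem pvGetD_mem (l : List Int) (p : Nat) (h : p < l.length) : l.getD p 0 ∈ l := by
  rw [List.getD_eq_getElem?_getD, List.getElem?_eq_getElem h]
  exact List.getElem_mem h

-- ---- count vectors ----

theorem pvPySetD_map_range {γ : Type} (m n : Nat) (f : Nat → γ) (v : γ) (h : n < m) :
    PySem.List.pySetD ((List.range m).map f) ((n : Nat) : Int) v
      = (List.range m).map (fun c => if c = n then v else f c) := by
  have hidx : PySem.List.pyIdx? ((List.range m).map f).length ((n : Nat) : Int) = some n := by
    simp [PySem.List.pyIdx?, h]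
  rw [PySem.List.pySetD, PySem.List.pySet?, hidx]
  simp only [Option.map_some, Option.getD_some]
  apply List.ext_getElem
  · simp
  · intro i h1 h2
    simp only [List.getElem_set, List.getElem_map, List.getElem_range] at *
    by_cases hi : i = n
    · subst hi; simp
    · simp [hi, Ne.symm hi]

theorem pvCountVec_spec (k : Nat) :
    ∀ (l : List Int), (∀ v ∈ l, ∃ j : Nat, j < k ∧ v = (j : Int)) →
      l.foldl pvInc (List.replicate k 0)
        = (List.range k).map (fun c => ((l.count ((c : Nat) : Int)) : Int)) := by
  have main : ∀ (l : List Int) (g : Nat → Int), (∀ v ∈ l, ∃ j : Nat, j < k ∧ v = (j : Int)) →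
      l.foldl pvInc ((List.range k).map g)
        = (List.range k).map (fun c => g c + ((l.count ((c : Nat) : Int)) : Int)) := by
    intro l
    induction l with
    | nil => intro g _; simp
    | cons x l ih =>
      intro g hb
      obtain ⟨j, hj, rfl⟩ := hb x (by simp)
      rw [List.foldl_cons]
      have hinc : pvInc ((List.range k).map g) ((j : Nat) : Int)
          = (List.range k).map (fun c => if c = j then g j + 1 else g c) := by
        rw [pvInc, PySem.List.pyGetD_natCast, List.getD_eq_getElem?_getD, List.getElem?_map,
          List.getElem?_range hj]
        simpa using pvPySetD_map_range k j g (g j + 1) hj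
      rw [hinc, ih _ (fun v hv => hb v (by simp [hv]))]
      apply List.map_congr_left
      intro c hc
      rw [List.count_cons]
      by_cases hcj : c = j
      · subst hcj; simp; ring
      · have : ¬ ((j : Int) = (c : Int)) := by exact_mod_cast Ne.symm hcj
        simp [hcj, this]
  intro l hb
  have h0 : (List.replicate k (0:Int)) = (List.range k).map (fun _ => 0) := by
    simp [List.map_const']
  rw [h0, main l (fun _ => 0) hb]
  simp

theorem pvFoldl_pair_split {σ τ ρ : Type} (f : σ → ρ → σ) (g : τ → ρ → τ) :
    ∀ (l : List ρ) (a : σ) (b : τ),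
      l.foldl (fun (st : σ × τ) o => (f st.1 o, g st.2 o)) (a, b) = (l.foldl f a, l.foldl g b) := by
  intro l
  induction l with
  | nil => intro a b; rfl
  | cons x l ih => intro a b; simp only [List.foldl_cons]; exact ih (f a x) (g b x)

theorem pvFoldl_if_inc {ρ : Type} (cond : ρ → Bool) (g : ρ → Int) :
    ∀ (l : List ρ) (acc : List Int),
      l.foldl (fun a o => if cond o then pvInc a (g o) else a) acc
        = ((l.filter cond).map g).foldl pvInc acc := by
  intro l
  induction l with
  | nil => intro acc; rfl
  | cons x l ih =>
    intro acc
    rw [List.foldl_cons, List.filter_cons]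
    by_cases hc : cond x
    · simp only [hc, if_true, List.map_cons, List.foldl_cons]; exact ih _
    · simp only [hc, if_false, Bool.false_eq_true]; exact ih _

def pvCV (k : Nat) (l : List Int) : List Int := l.foldl pvInc (List.replicate k 0)

theorem pvCntsSplit (condO condI : Nat → Bool) (cn : Nat → Int) (k size : Nat) :
    (List.range size).foldl (fun (st : List Int × List Int) o =>
        (if condO o then pvInc st.1 (cn o) else st.1,
         if condI o then pvInc st.2 (cn o) else st.2))
      (List.replicate k 0, List.replicate k 0)
    = ((((List.range size).filter condO).map cn).foldl pvInc (List.replicate k 0),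
       (((List.range size).filter condI).map cn).foldl pvInc (List.replicate k 0)) := by
  rw [pvFoldl_pair_split (fun a o => if condO o then pvInc a (cn o) else a)
      (fun b o => if condI o then pvInc b (cn o) else b),
    pvFoldl_if_inc, pvFoldl_if_inc]

theorem pvCV_perm (k : Nat) (l l' : List Int) (hp : l.Perm l')
    (hb : ∀ v ∈ l, ∃ j : Nat, j < k ∧ v = (j : Int)) :
    pvCV k l = pvCV k l' := by
  rw [pvCV, pvCV, pvCountVec_spec k l hb, pvCountVec_spec k l' (fun v hv => hb v (hp.mem_iff.mpr hv))]
  apply List.map_congr_left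
  intro c _
  rw [hp.count_eq]

theorem pvCV_eq_iff_perm (k : Nat) (l l' : List Int)
    (hb : ∀ v ∈ l, ∃ j : Nat, j < k ∧ v = (j : Int))
    (hb' : ∀ v ∈ l', ∃ j : Nat, j < k ∧ v = (j : Int)) :
    pvCV k l = pvCV k l' ↔ l.Perm l' := by
  constructor
  · intro h
    rw [pvCV, pvCV, pvCountVec_spec k l hb, pvCountVec_spec k l' hb'] at h
    have hcnt : ∀ j : Nat, j < k → l.count ((j : Nat) : Int) = l'.count ((j : Nat) : Int) := by
      intro j hj
      have := List.map_eq_map_iff.mp h j (List.mem_range.mpr hj)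
      exact_mod_cast this
    rw [List.perm_iff_count]
    intro v
    by_cases hmem : v ∈ l ∨ v ∈ l'
    · have : ∃ j : Nat, j < k ∧ v = (j : Int) := by
        rcases hmem with h1 | h1
        · exact hb v h1
        · exact hb' v h1
      obtain ⟨j, hj, rfl⟩ := this
      exact hcnt j hj
    · rw [not_or] at hmem
      rw [List.count_eq_zero_of_not_mem hmem.1, List.count_eq_zero_of_not_mem hmem.2]
  · intro hp
    exact pvCV_perm k l l' hp hb

-- counts transfer between two equality-pattern-equivalent labellings
theorem pvPermMap_aux (f g : Nat → Int) (l1 l2 : List Nat)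
    (h : ∀ a ∈ l1 ++ l2, ∀ b ∈ l1 ++ l2, (f a = f b ↔ g a = g b))
    (hp : (l1.map f).Perm (l2.map f)) : (l1.map g).Perm (l2.map g) := by
  have key : ∀ (l : List Nat), l = l1 ∨ l = l2 → ∀ a ∈ l1 ++ l2,
      (l.map g).count (g a) = (l.map f).count (f a) := by
    intro l hl a ha
    rw [List.count_eq_length_filter, List.count_eq_length_filter, List.filter_map,
      List.filter_map, List.length_map, List.length_map]
    congr 1
    apply List.filter_congr
    intro x hx
    have hxm : x ∈ l1 ++ l2 := by rcases hl with rfl | rfl <;> simp [hx]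
    have hiff := h x hxm a ha
    simp only [Function.comp_apply, beq_iff_eq]
    by_cases hfx : f x = f a
    · simp [hfx, hiff.mp hfx]
    · have hgx : ¬ g x = g a := fun hg => hfx (hiff.mpr hg)
      simp [hfx, hgx]
  rw [List.perm_iff_count]
  intro v
  by_cases hv : v ∈ l1.map g ∨ v ∈ l2.map g
  · have : ∃ a ∈ l1 ++ l2, g a = v := by
      rcases hv with h1 | h1
      · obtain ⟨a, ha, rfl⟩ := List.mem_map.mp h1; exact ⟨a, by simp [ha], rfl⟩
      · obtain ⟨a, ha, rfl⟩ := List.mem_map.mp h1; exact ⟨a, by simp [ha], rfl⟩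
    obtain ⟨a, ha, rfl⟩ := this
    rw [key l1 (Or.inl rfl) a ha, key l2 (Or.inr rfl) a ha, hp.count_eq]
  · push_neg at hv
    rw [List.count_eq_zero_of_not_mem hv.1, List.count_eq_zero_of_not_mem hv.2]

theorem pvPermMap_iff (f g : Nat → Int) (l1 l2 : List Nat)
    (h : ∀ a ∈ l1 ++ l2, ∀ b ∈ l1 ++ l2, (f a = f b ↔ g a = g b)) :
    (l1.map f).Perm (l2.map f) ↔ (l1.map g).Perm (l2.map g) :=
  ⟨pvPermMap_aux f g l1 l2 h, pvPermMap_aux g f l1 l2 (fun a ha b hb => (h a ha b hb).symm)⟩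

-- ---- canonical colors ----

def pvCanonical (colors : List Int) : Prop :=
  PySem.Set.ofList colors = (List.range (PySem.Set.ofList colors).length).map (fun (j : Nat) => (j : Int))

theorem pvMap_idxOf_self {α : Type} [BEq α] [LawfulBEq α] (F : List α) (h : F.Nodup) :
    F.map (fun x => ((List.idxOf x F : Nat) : Int)) = (List.range F.length).map (fun (j : Nat) => (j : Int)) := by
  apply List.ext_getElem
  · simp
  · intro i h1 h2
    simp [List.Nodup.idxOf_getElem h i (by simpa using h1)]

theorem pvOfList_relabel {α : Type} [BEq α] [LawfulBEq α] (xs : List α) :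
    PySem.Set.ofList (pvRelabel xs) = (PySem.Set.ofList xs).map (pvG xs) := by
  rw [pvRelabel_spec, pvOfList_eq_update, pvOfList_eq_update, ← List.map_nil (f := pvG xs)]
  exact pvOfList_map (pvG xs) xs []
    (by simp only [List.nil_append]
        intro x hx y hy hf
        exact pvG_inj hx hy hf)

theorem pvRelabel_canonical {α : Type} [BEq α] [LawfulBEq α] (xs : List α) :
    pvCanonical (pvRelabel xs) := by
  rw [pvCanonical, pvOfList_relabel]
  have hlen : ((PySem.Set.ofList xs).map (pvG xs)).length = (PySem.Set.ofList xs).length := by simp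
  rw [hlen]
  exact pvMap_idxOf_self (PySem.Set.ofList xs) (PySem.Set.nodup_ofList xs)

theorem pvALoop_canonical (adjacency : List (List Bool)) (size : Nat) :
    ∀ (fuel : Nat) (colors : List Int), (0 < fuel ∨ pvCanonical colors) →
      pvCanonical (pvALoop adjacency size fuel colors) := by
  intro fuel
  induction fuel with
  | zero =>
    intro colors h
    rcases h with h | h
    · omega
    · exact h
  | succ fuel ih =>
    intro colors _
    rw [pvALoop]
    by_cases hnext : pvStepA adjacency size colors = colors
    · rw [if_pos hnext, ← hnext]
      exact pvRelabel_canonical _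
    · rw [if_neg hnext]
      exact ih _ (Or.inr (pvRelabel_canonical _))

theorem pvStepA_length (adjacency : List (List Bool)) (size : Nat) (colors : List Int) :
    (pvStepA adjacency size colors).length = size := by
  rw [pvStepA, pvRelabel_length, List.length_map, List.length_range]

theorem pvALoop_length (adjacency : List (List Bool)) (size : Nat) :
    ∀ (fuel : Nat) (colors : List Int), 1 ≤ fuel →
      (pvALoop adjacency size fuel colors).length = size := by
  intro fuel
  induction fuel with
  | zero => intro colors h; omega
  | succ fuel ih =>
    intro colors _
    rw [pvALoop]
    by_cases hfix : pvStepA adjacency size colors = colors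
    · rw [if_pos hfix, ← hfix, pvStepA_length]
    · rw [if_neg hfix]
      cases fuel with
      | zero => show (pvStepA adjacency size colors).length = size; rw [pvStepA_length]
      | succ f => exact ih _ (by omega)

theorem pvALoop_fix (adjacency : List (List Bool)) (size : Nat)
    (colors : List Int) (h : pvStepA adjacency size colors = colors) :
    ∀ fuel, pvALoop adjacency size fuel colors = colors := by
  intro fuel
  cases fuel with
  | zero => rfl
  | succ f => rw [pvALoop, h, if_pos rfl]

-- ---- determinism of A's step in the equality pattern of the colors ----

def pvPattern (n : Nat) (c d : List Int) : Prop :=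
  ∀ u v : Nat, u < n → v < n → (c.getD u 0 = c.getD v 0 ↔ d.getD u 0 = d.getD v 0)

theorem pvPerm_of_map_perm (g : Int → Int) (Good : Int → Prop) (l l' : List Int)
    (hl : ∀ x ∈ l, Good x) (hl' : ∀ x ∈ l', Good x)
    (hinj : ∀ x y, Good x → Good y → g x = g y → x = y)
    (hp : (l.map g).Perm (l'.map g)) : l.Perm l' := by
  rw [List.perm_iff_count]
  intro v
  by_cases hv : v ∈ l ∨ v ∈ l'
  · have hGv : Good v := by rcases hv with h1 | h1; exacts [hl v h1, hl' v h1]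
    have e1 := pvCount_map_injOn g v l (fun y hy => hinj y v (hl y hy) hGv)
    have e2 := pvCount_map_injOn g v l' (fun y hy => hinj y v (hl' y hy) hGv)
    rw [← e1, ← e2, hp.count_eq]
  · push_neg at hv
    rw [List.count_eq_zero_of_not_mem hv.1, List.count_eq_zero_of_not_mem hv.2]

theorem pvSorted_map_sorted (g : Int → Int) (X : List Int) :
    PySem.List.sorted ((PySem.List.sorted X (fun x => x)).map g) (fun x => x)
      = PySem.List.sorted (X.map g) (fun x => x) := by
  exact (PySem.List.sorted_id_eq_sorted_id_iff_perm _ _).mpr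
    ((PySem.List.sorted_perm X (fun x => x) false).map g)

theorem pvStepA_pattern (adjacency : List (List Bool)) (n : Nat) (c d : List Int)
    (h : pvPattern n c d) : pvStepA adjacency n c = pvStepA adjacency n d := by
  set g : Int → Int := fun x => c.getD ((List.range n).findIdx (fun w => d.getD w 0 == x)) 0 with hgdef
  have htrans : ∀ v : Nat, v < n → g (d.getD v 0) = c.getD v 0 := by
    intro v hv
    have hex : ∃ w ∈ List.range n, (fun w => d.getD w 0 == d.getD v 0) w = true :=
      ⟨v, List.mem_range.mpr hv, by simp⟩
    set u := (List.range n).findIdx (fun w => d.getD w 0 == d.getD v 0) with hu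
    have hult : u < n := by
      have := List.findIdx_lt_length_of_exists hex
      simpa using this
    have hpred := List.findIdx_getElem (p := fun w => d.getD w 0 == d.getD v 0)
      (xs := List.range n) (w := by simpa using hult)
    rw [List.getElem_range] at hpred
    have hdu : d.getD u 0 = d.getD v 0 := by simpa using hpred
    have hcu : c.getD u 0 = c.getD v 0 := (h u v hult hv).mpr hdu
    show c.getD u 0 = c.getD v 0
    exact hcu
  have hmap : (List.range n).map (pvSigA adjacency n c)
      = ((List.range n).map (pvSigA adjacency n d)).map
          (fun s => (g s.1, PySem.List.sorted (s.2.1.map g) (fun x => x),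
            PySem.List.sorted (s.2.2.map g) (fun x => x))) := by
    rw [List.map_map]
    apply List.map_congr_left
    intro p hp
    have hpn := List.mem_range.mp hp
    show pvSigA adjacency n c p
      = (g (pvSigA adjacency n d p).1,
         PySem.List.sorted ((pvSigA adjacency n d p).2.1.map g) (fun x => x),
         PySem.List.sorted ((pvSigA adjacency n d p).2.2.map g) (fun x => x))
    rw [show pvSigA adjacency n d p
        = (d.getD p 0,
           PySem.List.sorted (((List.range n).filter (fun o => (adjacency.getD p []).getD o false)).map (fun o => d.getD o 0)) (fun x => x),
           PySem.List.sorted (((List.range n).filter (fun o => (adjacency.getD o []).getD p false)).map (fun o => d.getD o 0)) (fun x => x)) from rfl]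
    simp only [pvSigA]
    refine congrArg₂ Prod.mk (htrans p hpn).symm (congrArg₂ Prod.mk ?_ ?_)
    · rw [pvSorted_map_sorted]
      congr 1
      rw [List.map_map]
      apply List.map_congr_left
      intro o ho
      exact (htrans o (List.mem_range.mp (List.mem_of_mem_filter ho))).symm
    · rw [pvSorted_map_sorted]
      congr 1
      rw [List.map_map]
      apply List.map_congr_left
      intro o ho
      exact (htrans o (List.mem_range.mp (List.mem_of_mem_filter ho))).symm
  rw [pvStepA, pvStepA, hmap]
  apply pvRelabel_map
  intro s hs s' hs' hf
  obtain ⟨p, hp, rfl⟩ := List.mem_map.mp hs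
  obtain ⟨p', hp', rfl⟩ := List.mem_map.mp hs'
  have hpn := List.mem_range.mp hp
  have hpn' := List.mem_range.mp hp'
  have h1 := congrArg (fun t => t.1) hf
  have h2 := congrArg (fun t => t.2.1) hf
  have h3 := congrArg (fun t => t.2.2) hf
  simp only [pvSigA] at h1 h2 h3 ⊢
  have hGood : ∀ (q : Nat), q < n → ∃ w : Nat, w < n ∧ d.getD q 0 = d.getD w 0 :=
    fun q hq => ⟨q, hq, rfl⟩
  have hginj : ∀ x y, (∃ w : Nat, w < n ∧ x = d.getD w 0) → (∃ w : Nat, w < n ∧ y = d.getD w 0) →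
      g x = g y → x = y := by
    rintro x y ⟨w1, hw1, rfl⟩ ⟨w2, hw2, rfl⟩ hg
    rw [htrans w1 hw1, htrans w2 hw2] at hg
    exact (h w1 w2 hw1 hw2).mp hg
  have hfst : d.getD p 0 = d.getD p' 0 := by
    have : g (d.getD p 0) = g (d.getD p' 0) := h1
    rw [htrans p hpn, htrans p' hpn'] at this
    exact (h p p' hpn hpn').mp this
  have hlist : ∀ (N N' : List Nat), (∀ o ∈ N, o < n) → (∀ o ∈ N', o < n) →
      PySem.List.sorted ((PySem.List.sorted (N.map (fun o => d.getD o 0)) (fun x => x)).map g) (fun x => x)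
        = PySem.List.sorted ((PySem.List.sorted (N'.map (fun o => d.getD o 0)) (fun x => x)).map g) (fun x => x) →
      PySem.List.sorted (N.map (fun o => d.getD o 0)) (fun x => x)
        = PySem.List.sorted (N'.map (fun o => d.getD o 0)) (fun x => x) := by
    intro N N' hN hN' he
    set L := PySem.List.sorted (N.map (fun o => d.getD o 0)) (fun x => x) with hL
    set L' := PySem.List.sorted (N'.map (fun o => d.getD o 0)) (fun x => x) with hL'
    have hperm : (L.map g).Perm (L'.map g) :=
      (PySem.List.sorted_id_eq_sorted_id_iff_perm _ _).mp he
    have hmemL : ∀ x ∈ L, ∃ w : Nat, w < n ∧ x = d.getD w 0 := by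
      intro x hx
      rw [hL, PySem.List.mem_sorted] at hx
      obtain ⟨o, ho, rfl⟩ := List.mem_map.mp hx
      exact ⟨o, hN o ho, rfl⟩
    have hmemL' : ∀ x ∈ L', ∃ w : Nat, w < n ∧ x = d.getD w 0 := by
      intro x hx
      rw [hL', PySem.List.mem_sorted] at hx
      obtain ⟨o, ho, rfl⟩ := List.mem_map.mp hx
      exact ⟨o, hN' o ho, rfl⟩
    have hLL : L.Perm L' := pvPerm_of_map_perm g _ L L' hmemL hmemL' hginj hperm
    calc L = PySem.List.sorted L (fun x => x) := (PySem.List.sorted_sorted _ _).symm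
      _ = PySem.List.sorted L' (fun x => x) := (PySem.List.sorted_id_eq_sorted_id_iff_perm _ _).mpr hLL
      _ = L' := PySem.List.sorted_sorted _ _
  refine congrArg₂ Prod.mk hfst (congrArg₂ Prod.mk ?_ ?_)
  · refine hlist _ _ (fun o ho => List.mem_range.mp (List.mem_of_mem_filter ho))
      (fun o ho => List.mem_range.mp (List.mem_of_mem_filter ho)) h2
  · refine hlist _ _ (fun o ho => List.mem_range.mp (List.mem_of_mem_filter ho))
      (fun o ho => List.mem_range.mp (List.mem_of_mem_filter ho)) h3

-- ---- enumerate facts ----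

theorem pvEnum_fst (colors : List Int) : (pvEnum colors).map (fun p => p.1) = colors := by
  rw [pvEnum, List.map_map]
  exact List.zipIdx_map_fst 0 colors

theorem pvEnum_mem (colors : List Int) (q : Int × Int) :
    q ∈ pvEnum colors ↔ ∃ v : Nat, ∃ h : v < colors.length, q = (colors[v], (v : Int)) := by
  rw [pvEnum, List.mem_map]
  constructor
  · rintro ⟨⟨a, i⟩, hp, rfl⟩
    obtain ⟨h1, h2, h3⟩ := List.mem_zipIdx hp
    refine ⟨i, by omega, ?_⟩
    simp only [Nat.sub_zero] at h3
    simp [h3]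
  · rintro ⟨v, hv, rfl⟩
    refine ⟨(colors[v], v), List.mem_iff_getElem.mpr ⟨v, by simpa using hv, ?_⟩, rfl⟩
    rw [List.getElem_zipIdx]
    simp

theorem pvEnum_pairwise_snd (colors : List Int) :
    (pvEnum colors).Pairwise (fun p q => p.2 < q.2) := by
  rw [pvEnum, List.pairwise_map]
  rw [List.pairwise_iff_getElem]
  intro i j hi hj hij
  rw [List.getElem_zipIdx, List.getElem_zipIdx]
  simp only [Nat.zero_add]
  exact_mod_cast hij

-- head of the class of an occurring color x is x's first position
theorem pvIdxOf_min : ∀ (l : List Int) (a : Int) (j : Nat), ∀ hj : j < l.length,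
    j < l.idxOf a → l[j] ≠ a := by
  intro l
  induction l with
  | nil => intro a j hj; simp at hj
  | cons y t ih =>
    intro a j hj h
    rw [List.idxOf_cons] at h
    by_cases hy : y = a
    · simp [hy] at h
    · have hb : (y == a) = false := by simp [hy]
      rw [hb] at h
      simp only [cond_false] at h
      cases j with
      | zero => simpa using hy
      | succ j =>
        have := ih a j (by simpa using hj) (by omega)
        simpa using this

theorem pvEnum_filter_head (colors : List Int) (x : Int) (hx : x ∈ colors) :
    ∃ t, ((pvEnum colors).filter (fun q => q.1 == x)).map (fun q => q.2)
      = ((colors.idxOf x : Nat) : Int) :: t := by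
  set i := colors.idxOf x with hi
  have hilt : i < colors.length := List.idxOf_lt_length_iff.mpr hx
  have hsplit : colors = colors.take i ++ x :: colors.drop (i + 1) := by
    conv_lhs => rw [← List.take_append_drop i colors]
    rw [List.drop_eq_getElem_cons hilt, List.getElem_idxOf hilt]
  have henum : pvEnum colors
      = (colors.take i).zipIdx.map (fun p => (p.1, (p.2 : Int)))
        ++ ((x, (i : Int)) :: ((colors.drop (i+1)).zipIdx (i + 1)).map (fun p => (p.1, (p.2 : Int)))) := by
    rw [pvEnum]
    conv_lhs => rw [hsplit]
    rw [List.zipIdx_append, List.map_append, List.zipIdx_cons]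
    have hlen : (colors.take i).length = i := by
      rw [List.length_take]
      omega
    rw [hlen]
    simp
  rw [henum, List.filter_append]
  have h1 : ((colors.take i).zipIdx.map (fun p => (p.1, (p.2 : Int)))).filter (fun q => q.1 == x) = [] := by
    rw [List.filter_eq_nil_iff]
    rintro ⟨a, b⟩ hmem
    obtain ⟨⟨a', i'⟩, hp, he⟩ := List.mem_map.mp hmem
    obtain ⟨_, h2, h3⟩ := List.mem_zipIdx hp
    simp only [Nat.sub_zero] at h3
    rw [List.length_take] at h2
    rw [List.getElem_take] at h3
    have hne : colors[i']'(by omega) ≠ x := pvIdxOf_min colors x i' (by omega) (by omega)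
    simp only [Prod.mk.injEq] at he
    simp only [beq_iff_eq]
    rw [← he.1, h3]
    exact hne
  rw [h1, List.nil_append, List.filter_cons]
  simp only [beq_self_eq_true, if_true]
  exact ⟨_, rfl⟩

-- ---- grouping via dict-of-lists folds ----

theorem pvGroup_keys {κ : Type} [BEq κ] [LawfulBEq κ] (l : List (κ × Int)) :
    ((l.foldl (fun d p => d.modify p.1 [] (fun x => x ++ [p.2])) PySem.Dict.empty)).keys
      = PySem.Set.ofList (l.map (fun p => p.1)) := by
  rw [PySem.Dict.keys_foldl_modify_key l (fun p => p.1) [] (fun _ p v => v ++ [p.2]) PySem.Dict.empty,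
    PySem.Dict.keys_empty, ← pvOfList_eq_update]

theorem pvGroupPairs_values {κ : Type} [BEq κ] [LawfulBEq κ] (l : List (κ × Int)) :
    ((l.foldl (fun d p => d.modify p.1 [] (fun x => x ++ [p.2])) PySem.Dict.empty)).values
      = (PySem.Set.ofList (l.map (fun p => p.1))).map
          (fun s => (l.filter (fun p => p.1 == s)).map (fun p => p.2)) := by
  have hnd : ((l.foldl (fun d p => d.modify p.1 [] (fun x => x ++ [p.2])) PySem.Dict.empty)).keys.Nodup :=
    PySem.Dict.nodup_keys_foldl_modify_key l (fun p => p.1) [] (fun _ p v => v ++ [p.2])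
      PySem.Dict.empty (by rw [PySem.Dict.keys_empty]; exact List.nodup_nil)
  rw [PySem.Dict.values_eq_map_keys _ hnd [], pvGroup_keys]
  apply List.map_congr_left
  intro s _
  rw [PySem.Dict.getD_foldl_modify_append l PySem.Dict.empty s, PySem.Dict.getD_empty]
  simp

theorem pvSplitDict_eq_pairs {κ : Type} [BEq κ] [LawfulBEq κ] (key : Int → κ) (xs : List Int) :
    xs.foldl (fun d v => d.modify (key v) [] (fun x => x ++ [v])) PySem.Dict.empty
      = (xs.map (fun v => (key v, v))).foldl (fun d p => d.modify p.1 [] (fun x => x ++ [p.2])) PySem.Dict.empty := by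
  rw [List.foldl_map]

theorem pvSplitDict_values {κ : Type} [BEq κ] [LawfulBEq κ] (key : Int → κ) (xs : List Int) :
    ((xs.foldl (fun d v => d.modify (key v) [] (fun x => x ++ [v])) PySem.Dict.empty)).values
      = (PySem.Set.ofList (xs.map key)).map (fun s => xs.filter (fun v => key v == s)) := by
  rw [pvSplitDict_eq_pairs, pvGroupPairs_values]
  have h1 : (xs.map (fun v => (key v, v))).map (fun p => p.1) = xs.map key := by
    rw [List.map_map]; rfl
  rw [h1]
  apply List.map_congr_left
  intro s _
  rw [List.filter_map, List.map_map]
  have h2 : ((fun p : κ × Int => p.2) ∘ fun v => (key v, v)) = fun v => v := rfl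
  have h3 : ((fun p : κ × Int => p.1 == s) ∘ fun v => (key v, v)) = fun v => key v == s := rfl
  rw [h2, h3, List.map_id']

theorem pvSplitDict_size {κ : Type} [BEq κ] [LawfulBEq κ] (key : Int → κ) (xs : List Int) :
    ((xs.foldl (fun d v => d.modify (key v) [] (fun x => x ++ [v])) PySem.Dict.empty)).size
      = (PySem.Set.ofList (xs.map key)).length := by
  have hk : ((xs.foldl (fun d v => d.modify (key v) [] (fun x => x ++ [v])) PySem.Dict.empty)).keys
      = PySem.Set.ofList (xs.map key) := by
    rw [pvSplitDict_eq_pairs, pvGroup_keys, List.map_map]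
    rfl
  have : ((xs.foldl (fun d v => d.modify (key v) [] (fun x => x ++ [v])) PySem.Dict.empty)).size
      = ((xs.foldl (fun d v => d.modify (key v) [] (fun x => x ++ [v])) PySem.Dict.empty)).keys.length := by
    simp [PySem.Dict.size, PySem.Dict.keys]
  rw [this, hk]

-- A's final grouping, for canonical colors
theorem pvExtractA_canon (colors : List Int) (h : pvCanonical colors) :
    pvExtractA colors
      = (List.range (PySem.Set.ofList colors).length).map
          (fun j => ((pvEnum colors).filter (fun q => q.1 == ((j : Nat) : Int))).map (fun q => q.2)) := by
  set K := (PySem.Set.ofList colors).length with hK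
  rw [pvExtractA]
  have hkeys : ((pvEnum colors).foldl (fun d p => d.modify p.1 [] (fun x => x ++ [p.2])) PySem.Dict.empty).keys
      = (List.range K).map (fun j : Nat => (j : Int)) := by
    rw [pvGroup_keys, pvEnum_fst]
    exact h
  have hnd : ((pvEnum colors).foldl (fun d p => d.modify p.1 [] (fun x => x ++ [p.2])) PySem.Dict.empty).keys.Nodup := by
    rw [hkeys]
    exact List.Nodup.map (fun a b hab => by exact_mod_cast hab) List.nodup_range
  have hitems : ((pvEnum colors).foldl (fun d p => d.modify p.1 [] (fun x => x ++ [p.2])) PySem.Dict.empty).items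
      = (List.range K).map (fun j : Nat => (((j : Nat) : Int),
          ((pvEnum colors).filter (fun q => q.1 == ((j : Nat) : Int))).map (fun q => q.2))) := by
    rw [PySem.Dict.items_eq_map_keys _ hnd [], hkeys, List.map_map]
    apply List.map_congr_left
    intro j _
    show (((j : Nat) : Int), _) = _
    rw [PySem.Dict.getD_foldl_modify_append (pvEnum colors) PySem.Dict.empty (((j : Nat)) : Int),
      PySem.Dict.getD_empty]
    simp
  rw [hitems]
  have hsorted : PySem.List.sorted ((List.range K).map (fun j : Nat => (((j : Nat) : Int),
        ((pvEnum colors).filter (fun q => q.1 == ((j : Nat) : Int))).map (fun q => q.2))))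
        (fun it => it.1)
      = (List.range K).map (fun j : Nat => (((j : Nat) : Int),
        ((pvEnum colors).filter (fun q => q.1 == ((j : Nat) : Int))).map (fun q => q.2))) := by
    apply PySem.List.sorted_eq_self_of_pairwise
    rw [List.pairwise_map]
    refine List.pairwise_lt_range.imp (fun hab => ?_)
    dsimp only
    exact Int.le_of_lt (by exact_mod_cast hab)
  rw [hsorted, List.map_map]
  apply List.map_congr_left
  intro j _
  simp

-- ---- the partition invariant ----

def pvDisj (P : List (List Int)) : Prop :=
  P.Pairwise (fun b1 b2 => ∀ x, x ∈ b1 → x ∉ b2)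

def pvInv (n : Nat) (c : List Int) (P : List (List Int)) : Prop :=
  (∀ b ∈ P, b ≠ [] ∧ b.Pairwise (· < ·) ∧ ∀ x ∈ b, ∃ v : Nat, v < n ∧ x = (v : Int)) ∧
  pvDisj P ∧
  (∀ v : Nat, v < n → ∃ b ∈ P, ((v : Nat) : Int) ∈ b) ∧
  (∀ u v : Nat, u < n → v < n →
    ((∃ b ∈ P, ((u : Nat) : Int) ∈ b ∧ ((v : Nat) : Int) ∈ b) ↔ c.getD u 0 = c.getD v 0))

-- the unique index of the block containing x
def pvIota (P : List (List Int)) (x : Int) : Nat :=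
  P.findIdx (fun b => decide (x ∈ b))

theorem pvDisj_getElem (P : List (List Int)) (h : pvDisj P) (i j : Nat)
    (hi : i < P.length) (hj : j < P.length) (hne : i ≠ j) (x : Int)
    (hxi : x ∈ P[i]) : x ∉ P[j] := by
  rw [pvDisj, List.pairwise_iff_getElem] at h
  rcases Nat.lt_or_ge i j with hij | hij
  · exact h i j hi hj hij x hxi
  · have hji : j < i := by omega
    intro hxj
    exact h j i hj hi hji x hxj hxi

theorem pvIota_eq (P : List (List Int)) (h : pvDisj P) (i : Nat) (hi : i < P.length)
    (x : Int) (hx : x ∈ P[i]) : pvIota P x = i := by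
  rw [pvIota, List.findIdx_eq hi]
  refine ⟨by simpa using hx, ?_⟩
  intro j hji
  simp only [decide_eq_false_iff_not]
  exact pvDisj_getElem P h i j hi (by omega) (by omega) x hx

theorem pvIota_lt (P : List (List Int)) (b : List Int) (hb : b ∈ P) (x : Int) (hx : x ∈ b) :
    pvIota P x < P.length := by
  exact List.findIdx_lt_length_of_exists ⟨b, hb, by simpa using hx⟩

-- same ι ↔ same block ↔ same color
theorem pvIota_iff (n : Nat) (c : List Int) (P : List (List Int)) (hinv : pvInv n c P)
    (u v : Nat) (hu : u < n) (hv : v < n) :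
    (pvIota P ((u : Nat) : Int) = pvIota P ((v : Nat) : Int)) ↔ c.getD u 0 = c.getD v 0 := by
  obtain ⟨bu, hbu, hu2⟩ := hinv.2.2.1 u hu
  obtain ⟨bv, hbv, hv2⟩ := hinv.2.2.1 v hv
  obtain ⟨iu, hiu, hbu2⟩ := List.mem_iff_getElem.mp hbu
  obtain ⟨iv, hiv, hbv2⟩ := List.mem_iff_getElem.mp hbv
  have hu3 : pvIota P ((u : Nat) : Int) = iu :=
    pvIota_eq P hinv.2.1 iu hiu _ (hbu2 ▸ hu2)
  have hv3 : pvIota P ((v : Nat) : Int) = iv :=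
    pvIota_eq P hinv.2.1 iv hiv _ (hbv2 ▸ hv2)
  constructor
  · intro h
    have hiuiv : iu = iv := by omega
    refine (hinv.2.2.2 u v hu hv).mp ⟨bu, hbu, hu2, ?_⟩
    rw [← hbu2]
    rw [← hbv2] at hv2
    exact hiuiv ▸ hv2
  · intro h
    obtain ⟨b, hb, hub, hvb⟩ := (hinv.2.2.2 u v hu hv).mpr h
    obtain ⟨i, hi, hbi⟩ := List.mem_iff_getElem.mp hb
    rw [pvIota_eq P hinv.2.1 i hi _ (hbi ▸ hub), pvIota_eq P hinv.2.1 i hi _ (hbi ▸ hvb)]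

-- ---- block_of ----

theorem pvWriteBlock : ∀ (b : List Int) (L : List Int) (i : Int),
    (∀ x ∈ b, ∃ u : Nat, u < L.length ∧ x = (u : Int)) →
    ((b.foldl (fun bo2 x => PySem.List.pySetD bo2 x i) L).length = L.length ∧
     ∀ v : Nat, v < L.length →
      (b.foldl (fun bo2 x => PySem.List.pySetD bo2 x i) L).getD v 0
        = if ((v : Nat) : Int) ∈ b then i else L.getD v 0) := by
  intro b
  induction b with
  | nil => intro L i _; exact ⟨rfl, fun v hv => by simp⟩
  | cons x b ih =>
    intro L i hwf
    obtain ⟨u, hu, rfl⟩ := hwf x (by simp)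
    rw [List.foldl_cons, PySem.List.pySetD_natCast]
    obtain ⟨ihlen, ihget⟩ := ih (L.set u i) i (by
      intro y hy
      obtain ⟨w, hw, rfl⟩ := hwf y (by simp [hy])
      exact ⟨w, by simpa using hw, rfl⟩)
    refine ⟨by rw [ihlen]; simp, ?_⟩
    intro v hv
    rw [ihget v (by simpa using hv)]
    by_cases hmem : ((v : Nat) : Int) ∈ b
    · simp [hmem]
    · have hg : (L.set u i).getD v 0 = if u = v then i else L.getD v 0 := by
        rw [List.getD_eq_getElem _ _ (by simpa using hv), List.getElem_set,
          List.getD_eq_getElem _ _ hv]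
      rw [hg]
      by_cases hvu : u = v
      · subst hvu; simp [hmem]
      · have : ¬ ((v : Nat) : Int) ∈ ((u : Nat) : Int) :: b := by
          simp only [List.mem_cons, not_or]
          refine ⟨?_, hmem⟩
          intro hc
          exact hvu (by exact_mod_cast hc.symm)
        simp [hvu, hmem, this]

theorem pvBlockOf_fold : ∀ (Q : List (List Int)) (m : Nat) (L : List Int),
    (∀ b ∈ Q, ∀ x ∈ b, ∃ u : Nat, u < L.length ∧ x = (u : Int)) → pvDisj Q →
    ∀ v : Nat, v < L.length →
    ((Q.zipIdx m).foldl (fun bo bi => bi.1.foldl (fun bo2 x => PySem.List.pySetD bo2 x ((bi.2 : Nat) : Int)) bo) L).getD v 0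
      = if ((v : Nat) : Int) ∈ Q.flatten
          then (((m + Q.findIdx (fun b => decide (((v : Nat) : Int) ∈ b))) : Nat) : Int)
          else L.getD v 0 := by
  intro Q
  induction Q with
  | nil => intro m L _ _ v hv; simp
  | cons b Q ih =>
    intro m L hwf hdisj v hv
    rw [List.zipIdx_cons, List.foldl_cons]
    obtain ⟨hlen, hget⟩ := pvWriteBlock b L ((m : Nat) : Int) (hwf b (by simp))
    have hdj : ∀ b2 ∈ Q, ∀ x ∈ b, x ∉ b2 := by
      have := (List.pairwise_cons.mp hdisj).1
      intro b2 hb2 x hx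
      exact this b2 hb2 x hx
    rw [ih (m + 1) _ (by rw [hlen]; intro b2 hb2 x hx; exact hwf b2 (by simp [hb2]) x hx)
      (List.pairwise_cons.mp hdisj).2 v (by rw [hlen]; exact hv)]
    by_cases hvb : ((v : Nat) : Int) ∈ b
    · have hnq : ¬ ((v : Nat) : Int) ∈ Q.flatten := by
        intro hq
        obtain ⟨b2, hb2, hxb2⟩ := List.mem_flatten.mp hq
        exact hdj b2 hb2 _ hvb hxb2
      rw [if_neg hnq, hget v hv, if_pos hvb]
      have hfi : List.findIdx (fun b' => decide (((v : Nat) : Int) ∈ b')) (b :: Q) = 0 := by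
        rw [List.findIdx_cons]
        simp [hvb]
      rw [if_pos (by simp [hvb]), hfi]
      simp
    · rw [hget v hv, if_neg hvb]
      have hfi : List.findIdx (fun b' => decide (((v : Nat) : Int) ∈ b')) (b :: Q)
          = List.findIdx (fun b' => decide (((v : Nat) : Int) ∈ b')) Q + 1 := by
        rw [List.findIdx_cons]
        simp [hvb]
      by_cases hq : ((v : Nat) : Int) ∈ Q.flatten
      · rw [if_pos hq, if_pos (by simp [hq]), hfi]
        congr 1
        omega
      · rw [if_neg hq, if_neg (by simp [hvb, hq])]

theorem pvBlockOf_getD (n : Nat) (c : List Int) (P : List (List Int)) (hinv : pvInv n c P)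
    (v : Nat) (hv : v < n) :
    (pvBlockOf n P).getD v 0 = ((pvIota P ((v : Nat) : Int) : Nat) : Int) := by
  rw [pvBlockOf]
  rw [pvBlockOf_fold P 0 (List.replicate n 0)
    (by intro b hb x hx
        obtain ⟨u, hu, rfl⟩ := (hinv.1 b hb).2.2 x hx
        exact ⟨u, by simpa using hu, rfl⟩)
    hinv.2.1 v (by simpa using hv)]
  obtain ⟨b, hb, hvb⟩ := hinv.2.2.1 v hv
  rw [if_pos (List.mem_flatten.mpr ⟨b, hb, hvb⟩)]
  rw [pvIota]
  congr 1
  omega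

-- ---- signatures agree up to the partition/color dictionary ----

-- the A-side sorted neighbor color lists
def pvOutN (adjacency : List (List Bool)) (n : Nat) (p : Nat) : List Nat :=
  (List.range n).filter (fun o => (adjacency.getD p []).getD o false)
def pvInN (adjacency : List (List Bool)) (n : Nat) (p : Nat) : List Nat :=
  (List.range n).filter (fun o => (adjacency.getD o []).getD p false)

theorem pvSigB_eq_cv (adjacency : List (List Bool)) (n : Nat) (c : List Int) (P : List (List Int))
    (hinv : pvInv n c P) (u : Nat) (hu : u < n) :
    pvSigB adjacency n P.length (pvBlockOf n P) ((u : Nat) : Int)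
      = (pvCV P.length ((pvOutN adjacency n u).map (fun o => ((pvIota P ((o : Nat) : Int) : Nat) : Int))),
         pvCV P.length ((pvInN adjacency n u).map (fun o => ((pvIota P ((o : Nat) : Int) : Nat) : Int)))) := by
  rw [pvSigB]
  simp only [PySem.List.pyGetD_natCast]
  rw [pvCntsSplit (fun o => (adjacency.getD u []).getD o false)
      (fun o => (adjacency.getD o []).getD u false)
      (fun o => (pvBlockOf n P).getD o 0) P.length n]
  have hbo : ∀ (cond : Nat → Bool),
      (((List.range n).filter cond).map (fun o => (pvBlockOf n P).getD o 0))
        = (((List.range n).filter cond).map (fun o => ((pvIota P ((o : Nat) : Int) : Nat) : Int))) := by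
    intro cond
    apply List.map_congr_left
    intro o ho
    exact pvBlockOf_getD n c P hinv o (List.mem_range.mp (List.mem_of_mem_filter ho))
  refine congrArg₂ Prod.mk ?_ ?_
  · rw [hbo]; rfl
  · rw [hbo]; rfl

-- within positions of equal color, B's signature separates exactly as A's next color does
theorem pvStepA_getD_iff (adjacency : List (List Bool)) (n : Nat) (c : List Int)
    (u v : Nat) (hu : u < n) (hv : v < n) :
    (pvStepA adjacency n c).getD u 0 = (pvStepA adjacency n c).getD v 0
      ↔ pvSigA adjacency n c u = pvSigA adjacency n c v := by
  have hlen : ((List.range n).map (pvSigA adjacency n c)).length = n := by simp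
  have hget : ∀ w : Nat, w < n →
      (pvStepA adjacency n c).getD w 0
        = pvG ((List.range n).map (pvSigA adjacency n c)) (pvSigA adjacency n c w) := by
    intro w hw
    rw [pvStepA, pvRelabel_spec]
    rw [List.getD_eq_getElem _ _ (by simpa using hw), List.getElem_map, List.getElem_map,
      List.getElem_range]
  rw [hget u hu, hget v hv]
  constructor
  · intro hgg
    exact pvG_inj (List.mem_map.mpr ⟨u, List.mem_range.mpr hu, rfl⟩)
      (List.mem_map.mpr ⟨v, List.mem_range.mpr hv, rfl⟩) hgg
  · intro hs; rw [hs]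

theorem pvSig_iff (adjacency : List (List Bool)) (n : Nat) (c : List Int) (P : List (List Int))
    (hinv : pvInv n c P) (u v : Nat) (hu : u < n) (hv : v < n) (hc : c.getD u 0 = c.getD v 0) :
    (pvSigB adjacency n P.length (pvBlockOf n P) ((u : Nat) : Int)
       = pvSigB adjacency n P.length (pvBlockOf n P) ((v : Nat) : Int))
    ↔ (pvStepA adjacency n c).getD u 0 = (pvStepA adjacency n c).getD v 0 := by
  rw [pvStepA_getD_iff adjacency n c u v hu hv,
    pvSigB_eq_cv adjacency n c P hinv u hu, pvSigB_eq_cv adjacency n c P hinv v hv]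
  have hNsub : ∀ (N : List Nat), (∀ o ∈ N, o < n) →
      ∀ x ∈ N.map (fun o => ((pvIota P ((o : Nat) : Int) : Nat) : Int)),
        ∃ j : Nat, j < P.length ∧ x = (j : Int) := by
    intro N hN x hx
    obtain ⟨o, ho, rfl⟩ := List.mem_map.mp hx
    obtain ⟨b, hb, hob⟩ := hinv.2.2.1 o (hN o ho)
    exact ⟨pvIota P ((o : Nat) : Int), pvIota_lt P b hb _ hob, rfl⟩
  have hmemOut : ∀ o ∈ pvOutN adjacency n u ++ pvOutN adjacency n v, o < n := by
    intro o ho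
    rcases List.mem_append.mp ho with h1 | h1 <;>
      exact List.mem_range.mp (List.mem_of_mem_filter h1)
  have hmemIn : ∀ o ∈ pvInN adjacency n u ++ pvInN adjacency n v, o < n := by
    intro o ho
    rcases List.mem_append.mp ho with h1 | h1 <;>
      exact List.mem_range.mp (List.mem_of_mem_filter h1)
  have hpermiff : ∀ (N N' : List Nat), (∀ o ∈ N ++ N', o < n) →
      (((N.map (fun o => ((pvIota P ((o : Nat) : Int) : Nat) : Int))).Perm
          (N'.map (fun o => ((pvIota P ((o : Nat) : Int) : Nat) : Int))))
        ↔ ((N.map (fun o => c.getD o 0)).Perm (N'.map (fun o => c.getD o 0)))) := by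
    intro N N' hNN
    apply pvPermMap_iff
    intro a ha b hb
    have han := hNN a ha
    have hbn := hNN b hb
    constructor
    · intro hf
      have : pvIota P ((a : Nat) : Int) = pvIota P ((b : Nat) : Int) := by exact_mod_cast hf
      exact (pvIota_iff n c P hinv a b han hbn).mp this
    · intro hg
      have := (pvIota_iff n c P hinv a b han hbn).mpr hg
      exact_mod_cast this
  have hsorted_iff : ∀ (N N' : List Nat),
      (PySem.List.sorted (N.map (fun o => c.getD o 0)) (fun x => x)
          = PySem.List.sorted (N'.map (fun o => c.getD o 0)) (fun x => x))
        ↔ ((N.map (fun o => c.getD o 0)).Perm (N'.map (fun o => c.getD o 0))) :=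
    fun N N' => PySem.List.sorted_id_eq_sorted_id_iff_perm _ _
  have hsigA : pvSigA adjacency n c u = pvSigA adjacency n c v
      ↔ ((PySem.List.sorted ((pvOutN adjacency n u).map (fun o => c.getD o 0)) (fun x => x)
            = PySem.List.sorted ((pvOutN adjacency n v).map (fun o => c.getD o 0)) (fun x => x))
          ∧ (PySem.List.sorted ((pvInN adjacency n u).map (fun o => c.getD o 0)) (fun x => x)
            = PySem.List.sorted ((pvInN adjacency n v).map (fun o => c.getD o 0)) (fun x => x))) := by
    rw [pvSigA, pvSigA, Prod.ext_iff, Prod.ext_iff]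
    dsimp only
    rw [pvOutN, pvInN, pvOutN, pvInN]
    constructor
    · rintro ⟨_, h2, h3⟩; exact ⟨h2, h3⟩
    · rintro ⟨h2, h3⟩; exact ⟨hc, h2, h3⟩
  rw [Prod.ext_iff]
  dsimp only
  rw [pvCV_eq_iff_perm P.length _ _
      (hNsub _ (fun o ho => hmemOut o (List.mem_append.mpr (Or.inl ho))))
      (hNsub _ (fun o ho => hmemOut o (List.mem_append.mpr (Or.inr ho)))),
    pvCV_eq_iff_perm P.length _ _
      (hNsub _ (fun o ho => hmemIn o (List.mem_append.mpr (Or.inl ho))))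
      (hNsub _ (fun o ho => hmemIn o (List.mem_append.mpr (Or.inr ho)))),
    hpermiff _ _ hmemOut, hpermiff _ _ hmemIn, hsigA,
    hsorted_iff (pvOutN adjacency n u) (pvOutN adjacency n v),
    hsorted_iff (pvInN adjacency n u) (pvInN adjacency n v)]

-- ---- one refinement round ----

theorem pvFoldl_or {ρ : Type} (q : ρ → Bool) :
    ∀ (l : List ρ) (b : Bool), l.foldl (fun acc x => acc || q x) b = (b || l.any q) := by
  intro l
  induction l with
  | nil => intro b; simp
  | cons x l ih =>
    intro b
    rw [List.foldl_cons, ih]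
    simp [Bool.or_assoc]

theorem pvRoundB_spec (adjacency : List (List Bool)) (n : Nat) (P : List (List Int)) :
    pvRoundB adjacency n P
      = ((P.map (fun b =>
            (PySem.Set.ofList (b.map (pvSigB adjacency n P.length (pvBlockOf n P)))).map
              (fun s => b.filter (fun v => pvSigB adjacency n P.length (pvBlockOf n P) v == s)))).flatten,
         P.any (fun b => decide (1 < (PySem.Set.ofList (b.map (pvSigB adjacency n P.length (pvBlockOf n P)))).length))) := by
  have hdef : pvRoundB adjacency n P
      = P.foldl
          (fun (st : List (List Int) × Bool) block =>
            ((fun (a : List (List Int)) (block : List Int) =>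
                a ++ ((block.foldl
                  (fun d member => d.modify (pvSigB adjacency n P.length (pvBlockOf n P) member) []
                    (fun x => x ++ [member]))
                  PySem.Dict.empty : PySem.Dict (List Int × List Int) (List Int))).values) st.1 block,
             (fun (bl : Bool) (block : List Int) =>
                bl || decide (1 < ((block.foldl
                  (fun d member => d.modify (pvSigB adjacency n P.length (pvBlockOf n P) member) []
                    (fun x => x ++ [member]))
                  PySem.Dict.empty : PySem.Dict (List Int × List Int) (List Int))).size)) st.2 block))
          ([], false) := rfl
  rw [hdef, pvFoldl_pair_split
      (fun (a : List (List Int)) (block : List Int) =>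
        a ++ ((block.foldl
          (fun d member => d.modify (pvSigB adjacency n P.length (pvBlockOf n P) member) []
            (fun x => x ++ [member]))
          PySem.Dict.empty : PySem.Dict (List Int × List Int) (List Int))).values)
      (fun (bl : Bool) (block : List Int) =>
        bl || decide (1 < ((block.foldl
          (fun d member => d.modify (pvSigB adjacency n P.length (pvBlockOf n P) member) []
            (fun x => x ++ [member]))
          PySem.Dict.empty : PySem.Dict (List Int × List Int) (List Int))).size))
      P [] false]
  refine congrArg₂ Prod.mk ?_ ?_
  · rw [PySem.List.foldl_append_eq_flatMap, List.nil_append, List.flatMap_def]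
    congr 1
    apply List.map_congr_left
    intro b _
    rw [pvSplitDict_values (pvSigB adjacency n P.length (pvBlockOf n P)) b]
  · rw [pvFoldl_or, Bool.false_or]
    refine List.any_congr rfl (fun b => ?_)
    rw [pvSplitDict_size (pvSigB adjacency n P.length (pvBlockOf n P)) b]

theorem pvRound_inv (adjacency : List (List Bool)) (n : Nat) (c : List Int) (P : List (List Int))
    (hinv : pvInv n c P) :
    pvInv n (pvStepA adjacency n c) (pvRoundB adjacency n P).1 := by
  rw [pvRoundB_spec]
  dsimp only
  set sig' := pvSigB adjacency n P.length (pvBlockOf n P) with hsigdef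
  have hmem' : ∀ b', b' ∈ (P.map (fun b =>
      (PySem.Set.ofList (b.map sig')).map (fun s => b.filter (fun v => sig' v == s)))).flatten
      ↔ ∃ b ∈ P, ∃ s ∈ PySem.Set.ofList (b.map sig'),
          b' = b.filter (fun v => sig' v == s) := by
    intro b'
    rw [List.mem_flatten]
    constructor
    · rintro ⟨L, hL, hbL⟩
      obtain ⟨b, hb, rfl⟩ := List.mem_map.mp hL
      obtain ⟨s, hs, rfl⟩ := List.mem_map.mp hbL
      exact ⟨b, hb, s, hs, rfl⟩
    · rintro ⟨b, hb, s, hs, rfl⟩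
      exact ⟨_, List.mem_map.mpr ⟨b, hb, rfl⟩, List.mem_map.mpr ⟨s, hs, rfl⟩⟩
  refine ⟨?_, ?_, ?_, ?_⟩
  · intro b' hb'
    obtain ⟨b, hb, s, hs, rfl⟩ := (hmem' _).mp hb'
    obtain ⟨x0, hx0, hsx0⟩ := List.mem_map.mp ((PySem.Set.mem_ofList _ _).mp hs)
    refine ⟨?_, ?_, ?_⟩
    · exact List.ne_nil_of_mem (List.mem_filter.mpr ⟨hx0, by simp [hsx0]⟩)
    · exact ((hinv.1 b hb).2.1).filter _
    · intro x hx
      exact (hinv.1 b hb).2.2 x (List.mem_of_mem_filter hx)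
  · rw [pvDisj, List.pairwise_flatten]
    constructor
    · intro L hL
      obtain ⟨b, hb, rfl⟩ := List.mem_map.mp hL
      rw [List.pairwise_map]
      have hnd : (PySem.Set.ofList (b.map sig')).Nodup := PySem.Set.nodup_ofList _
      refine List.Pairwise.imp ?_ hnd
      intro s1 s2 hne x hx1 hx2
      apply hne
      have e1 := (List.mem_filter.mp hx1).2
      have e2 := (List.mem_filter.mp hx2).2
      rw [beq_iff_eq] at e1 e2
      rw [← e1, ← e2]
    · rw [List.pairwise_map]
      refine List.Pairwise.imp ?_ hinv.2.1
      intro b1 b2 hd b1' hb1' b2' hb2' x hx1 hx2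
      obtain ⟨s1, _, rfl⟩ := List.mem_map.mp hb1'
      obtain ⟨s2, _, rfl⟩ := List.mem_map.mp hb2'
      exact hd x (List.mem_of_mem_filter hx1) (List.mem_of_mem_filter hx2)
  · intro v hv
    obtain ⟨b, hb, hvb⟩ := hinv.2.2.1 v hv
    refine ⟨b.filter (fun y => sig' y == sig' ((v : Nat) : Int)),
      (hmem' _).mpr ⟨b, hb, sig' ((v : Nat) : Int), ?_, rfl⟩, ?_⟩
    · exact (PySem.Set.mem_ofList _ _).mpr (List.mem_map.mpr ⟨_, hvb, rfl⟩)
    · exact List.mem_filter.mpr ⟨hvb, by simp⟩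
  · intro u v hu hv
    constructor
    · rintro ⟨b', hb', hub', hvb'⟩
      obtain ⟨b, hb, s, hs, rfl⟩ := (hmem' _).mp hb'
      have hub := List.mem_of_mem_filter hub'
      have hvb := List.mem_of_mem_filter hvb'
      have hc : c.getD u 0 = c.getD v 0 := (hinv.2.2.2 u v hu hv).mp ⟨b, hb, hub, hvb⟩
      have hsu := (List.mem_filter.mp hub').2
      have hsv := (List.mem_filter.mp hvb').2
      rw [beq_iff_eq] at hsu hsv
      have hsig : sig' ((u : Nat) : Int) = sig' ((v : Nat) : Int) := by rw [hsu, hsv]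
      exact (pvSig_iff adjacency n c P hinv u v hu hv hc).mp hsig
    · intro hstep
      have hsigA : pvSigA adjacency n c u = pvSigA adjacency n c v :=
        (pvStepA_getD_iff adjacency n c u v hu hv).mp hstep
      have hc : c.getD u 0 = c.getD v 0 := by
        have := congrArg (fun t => t.1) hsigA
        simpa [pvSigA] using this
      obtain ⟨b, hb, hub, hvb⟩ := (hinv.2.2.2 u v hu hv).mpr hc
      have hsig : sig' ((u : Nat) : Int) = sig' ((v : Nat) : Int) :=
        (pvSig_iff adjacency n c P hinv u v hu hv hc).mpr hstep
      refine ⟨b.filter (fun y => sig' y == sig' ((u : Nat) : Int)),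
        (hmem' _).mpr ⟨b, hb, sig' ((u : Nat) : Int), ?_, rfl⟩, ?_, ?_⟩
      · exact (PySem.Set.mem_ofList _ _).mpr (List.mem_map.mpr ⟨_, hub, rfl⟩)
      · exact List.mem_filter.mpr ⟨hub, by simp⟩
      · exact List.mem_filter.mpr ⟨hvb, by simp [hsig]⟩

theorem pvRound_unchanged (adjacency : List (List Bool)) (n : Nat) (P : List (List Int))
    (hwf : ∀ b ∈ P, b ≠ [])
    (h : (pvRoundB adjacency n P).2 = false) : (pvRoundB adjacency n P).1 = P := by
  rw [pvRoundB_spec] at h ⊢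
  dsimp only at h ⊢
  have h2 : ∀ b ∈ P, ¬ (1 < (PySem.Set.ofList (b.map (pvSigB adjacency n P.length (pvBlockOf n P)))).length) := by
    intro b hb hgt
    have htrue : (P.any (fun b => decide (1 < (PySem.Set.ofList (b.map (pvSigB adjacency n P.length (pvBlockOf n P)))).length))) = true :=
      List.any_eq_true.mpr ⟨b, hb, by simpa using hgt⟩
    rw [htrue] at h
    cases h
  have hmap : P.map (fun b =>
        (PySem.Set.ofList (b.map (pvSigB adjacency n P.length (pvBlockOf n P)))).map
          (fun s => b.filter (fun v => pvSigB adjacency n P.length (pvBlockOf n P) v == s)))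
      = P.map (fun b => [b]) := by
    apply List.map_congr_left
    intro b hb
    have hne := hwf b hb
    obtain ⟨y, t, rfl⟩ := List.exists_cons_of_ne_nil hne
    have hmem : pvSigB adjacency n P.length (pvBlockOf n P) y
        ∈ PySem.Set.ofList ((y :: t).map (pvSigB adjacency n P.length (pvBlockOf n P))) :=
      (PySem.Set.mem_ofList _ _).mpr (List.mem_map.mpr ⟨y, by simp, rfl⟩)
    have hlen1 : (PySem.Set.ofList ((y :: t).map (pvSigB adjacency n P.length (pvBlockOf n P)))).length = 1 := by
      have hpos : 0 < (PySem.Set.ofList ((y :: t).map (pvSigB adjacency n P.length (pvBlockOf n P)))).length :=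
        List.length_pos_of_mem hmem
      have := h2 _ hb
      omega
    obtain ⟨a, ha⟩ := List.length_eq_one_iff.mp hlen1
    rw [ha]
    have hall : ∀ x ∈ (y :: t), pvSigB adjacency n P.length (pvBlockOf n P) x = a := by
      intro x hx
      have : pvSigB adjacency n P.length (pvBlockOf n P) x
          ∈ PySem.Set.ofList ((y :: t).map (pvSigB adjacency n P.length (pvBlockOf n P))) :=
        (PySem.Set.mem_ofList _ _).mpr (List.mem_map.mpr ⟨x, hx, rfl⟩)
      rw [ha] at this
      simpa using this
    rw [List.map_cons, List.map_nil]
    congr 1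
    rw [List.filter_eq_self]
    intro x hx
    simp [hall x hx]
  rw [hmap]
  have hflat : ∀ (Q : List (List Int)), (Q.map (fun b => [b])).flatten = Q := by
    intro Q
    induction Q with
    | nil => rfl
    | cons b Q ihq => simp [ihq]
  exact hflat P

theorem pvRound_changed_ne (adjacency : List (List Bool)) (n : Nat) (c : List Int)
    (P : List (List Int)) (hinv : pvInv n c P)
    (h : (pvRoundB adjacency n P).2 = true) : pvStepA adjacency n c ≠ c := by
  intro heq
  rw [pvRoundB_spec] at h
  dsimp only at h
  set sig' := pvSigB adjacency n P.length (pvBlockOf n P) with hsigdef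
  obtain ⟨b, hb, hq⟩ := List.any_eq_true.mp h
  have hgt : 1 < (PySem.Set.ofList (b.map sig')).length := by simpa using hq
  set l := PySem.Set.ofList (b.map sig') with hl
  have hnd : l.Nodup := PySem.Set.nodup_ofList _
  have h01 : l[0]'(by omega) ≠ l[1]'(by omega) := by
    have := List.pairwise_iff_getElem.mp hnd 0 1 (by omega) (by omega) (by omega)
    exact this
  have hm0 : l[0]'(by omega) ∈ b.map sig' := by
    have : l[0]'(by omega) ∈ l := List.getElem_mem _
    exact (PySem.Set.mem_ofList _ _).mp this
  have hm1 : l[1]'(by omega) ∈ b.map sig' := by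
    have : l[1]'(by omega) ∈ l := List.getElem_mem _
    exact (PySem.Set.mem_ofList _ _).mp this
  obtain ⟨x0, hx0, hs0⟩ := List.mem_map.mp hm0
  obtain ⟨x1, hx1, hs1⟩ := List.mem_map.mp hm1
  obtain ⟨u, hu, rfl⟩ := (hinv.1 b hb).2.2 x0 hx0
  obtain ⟨v, hv, rfl⟩ := (hinv.1 b hb).2.2 x1 hx1
  have hc : c.getD u 0 = c.getD v 0 := (hinv.2.2.2 u v hu hv).mp ⟨b, hb, hx0, hx1⟩
  have hsne : sig' ((u : Nat) : Int) ≠ sig' ((v : Nat) : Int) := by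
    rw [hs0, hs1]
    exact h01
  have := (pvSig_iff adjacency n c P hinv u v hu hv hc).not.mp hsne
  rw [heq] at this
  exact this hc

-- ---- the loops, run with the same fuel, stay related ----

theorem pvMain (adjacency : List (List Bool)) (n : Nat) :
    ∀ (fuel : Nat) (c : List Int) (P : List (List Int)), pvInv n c P →
      pvInv n (pvALoop adjacency n fuel c) (pvBLoop adjacency n fuel P) := by
  intro fuel
  induction fuel with
  | zero => intro c P h; exact h
  | succ fuel ih =>
    intro c P hinv
    rw [pvALoop, pvBLoop]
    cases hch : (pvRoundB adjacency n P).2 with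
    | false =>
      simp only [if_false, Bool.false_eq_true]
      rw [pvRound_unchanged adjacency n P (fun b hb => (hinv.1 b hb).1) hch]
      by_cases hfix : pvStepA adjacency n c = c
      · rw [if_pos hfix]; exact hinv
      · rw [if_neg hfix]
        have hinv' : pvInv n (pvStepA adjacency n c) P := by
          have := pvRound_inv adjacency n c P hinv
          rwa [pvRound_unchanged adjacency n P (fun b hb => (hinv.1 b hb).1) hch] at this
        have hpat : pvPattern n (pvStepA adjacency n c) c := by
          intro u v hu hv
          rw [← hinv'.2.2.2 u v hu hv, ← hinv.2.2.2 u v hu hv]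
        have hfix2 : pvStepA adjacency n (pvStepA adjacency n c) = pvStepA adjacency n c :=
          pvStepA_pattern adjacency n _ _ hpat
        rw [pvALoop_fix adjacency n _ hfix2]
        exact hinv'
    | true =>
      simp only [if_true]
      have hne : pvStepA adjacency n c ≠ c := pvRound_changed_ne adjacency n c P hinv hch
      rw [if_neg hne]
      exact ih _ _ (pvRound_inv adjacency n c P hinv)

-- ---- first occurrences are increasing in the dedup order ----

theorem pvUpdate_firstocc : ∀ (l : List Int),
    ∀ S : List Int, ∃ t, PySem.Set.update S l = S ++ t ∧ (∀ a ∈ t, a ∉ S) ∧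
      t.Pairwise (fun a b => l.idxOf a < l.idxOf b) := by
  intro l
  induction l with
  | nil =>
    intro S
    exact ⟨[], by simp [PySem.Set.update], by simp, List.Pairwise.nil⟩
  | cons x l ih =>
    intro S
    have hupd : PySem.Set.update S (x :: l) = PySem.Set.update (PySem.Set.add S x) l := rfl
    have hshift : ∀ a : Int, a ≠ x → (x :: l).idxOf a = l.idxOf a + 1 := by
      intro a ha
      rw [List.idxOf_cons]
      have : (x == a) = false := by simp [Ne.symm ha]
      rw [this]
      rfl
    by_cases hm : x ∈ S
    · have hadd : PySem.Set.add S x = S := by rw [pvAdd_eq, if_pos hm]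
      obtain ⟨t, ht, htS, htp⟩ := ih S
      refine ⟨t, by rw [hupd, hadd, ht], htS, ?_⟩
      refine htp.imp_of_mem (fun {a b} hat hbt hab => ?_)
      rw [hshift a (fun he => htS a hat (he ▸ hm)), hshift b (fun he => htS b hbt (he ▸ hm))]
      omega
    · have hadd : PySem.Set.add S x = S ++ [x] := by rw [pvAdd_eq, if_neg hm]
      obtain ⟨t, ht, htS, htp⟩ := ih (S ++ [x])
      have hne : ∀ a ∈ t, a ≠ x := by
        intro a hat he
        exact htS a hat (by simp [he])
      refine ⟨x :: t, ?_, ?_, ?_⟩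
      · rw [hupd, hadd, ht, List.append_assoc]
        rfl
      · intro a hat
        rcases List.mem_cons.mp hat with rfl | hat'
        · exact hm
        · intro haS
          exact htS a hat' (by simp [haS])
      · rw [List.pairwise_cons]
        constructor
        · intro b hbt
          rw [hshift b (hne b hbt)]
          have : (x :: l).idxOf x = 0 := by
            rw [List.idxOf_cons]
            simp
          omega
        · refine htp.imp_of_mem (fun {a b} hat hbt hab => ?_)
          rw [hshift a (hne a hat), hshift b (hne b hbt)]
          omega

theorem pvCanonical_idxOf_mono (c : List Int) (h : pvCanonical c) (i j : Nat)
    (hij : i < j) (hj : j < (PySem.Set.ofList c).length) :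
    c.idxOf ((i : Nat) : Int) < c.idxOf ((j : Nat) : Int) := by
  obtain ⟨t, ht, _, htp⟩ := pvUpdate_firstocc c []
  have hofl : PySem.Set.ofList c = t := by rw [pvOfList_eq_update, ht]; rfl
  have hp2 : (PySem.Set.ofList c).Pairwise (fun a b => c.idxOf a < c.idxOf b) := hofl ▸ htp
  rw [pvCanonical] at h
  rw [h] at hp2
  rw [List.pairwise_map, List.pairwise_iff_getElem] at hp2
  have := hp2 i j (by simpa using lt_trans hij hj) (by simpa using hj) hij
  simpa using this

-- ---- the final extraction: both orders are "classes by smallest member" ----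

theorem pvAB_mem (keys : List Int) (s y : Int) :
    y ∈ ((pvEnum keys).filter (fun q => q.1 == s)).map (fun q => q.2)
      ↔ ∃ w : Nat, ∃ _ : w < keys.length, y = (w : Int) ∧ keys[w] = s := by
  constructor
  · intro hy
    obtain ⟨q, hq, rfl⟩ := List.mem_map.mp hy
    obtain ⟨hqe, hqs⟩ := List.mem_filter.mp hq
    obtain ⟨w, hw, rfl⟩ := (pvEnum_mem keys q).mp hqe
    exact ⟨w, hw, rfl, by simpa using hqs⟩
  · rintro ⟨w, hw, rfl, hkw⟩
    refine List.mem_map.mpr ⟨(keys[w], (w : Int)), List.mem_filter.mpr ⟨?_, by simp [hkw]⟩, rfl⟩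
    exact (pvEnum_mem keys _).mpr ⟨w, hw, rfl⟩

theorem pvAB_pairwise (keys : List Int) (s : Int) :
    (((pvEnum keys).filter (fun q => q.1 == s)).map (fun q => q.2)).Pairwise (· < ·) := by
  rw [List.pairwise_map]
  exact (pvEnum_pairwise_snd keys).filter _

theorem pvSortedEqOfMem (l1 l2 : List Int) (h1 : l1.Pairwise (· < ·)) (h2 : l2.Pairwise (· < ·))
    (hm : ∀ x, x ∈ l1 ↔ x ∈ l2) : l1 = l2 := by
  have nd1 : l1.Nodup := h1.imp (fun hab => ne_of_lt hab)
  have nd2 : l2.Nodup := h2.imp (fun hab => ne_of_lt hab)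
  have hp : l1.Perm l2 := (List.perm_ext_iff_of_nodup nd1 nd2).mpr hm
  exact List.Perm.eq_of_pairwise (fun a b _ _ hab hba => by omega)
    (h1.imp le_of_lt) (h2.imp le_of_lt) hp

theorem pvPyGetD_zero (x : Int) (t : List Int) : PySem.List.pyGetD (x :: t) 0 0 = x := by
  rw [show (0 : Int) = ((0 : Nat) : Int) from rfl, PySem.List.pyGetD_natCast]
  rfl

theorem pvFinal (adjacency : List (List Bool)) (n : Nat) (c : List Int) (P : List (List Int))
    (hlen : c.length = n) (hcan : pvCanonical c) (hinv : pvInv n c P) :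
    pvExtractA c = PySem.List.sorted P (fun block => PySem.List.pyGetD block 0 0) := by
  set K := (PySem.Set.ofList c).length with hK
  rw [pvExtractA_canon c hcan]
  have hmemc : ∀ j : Nat, j < K → ((j : Nat) : Int) ∈ c := by
    intro j hj
    have : ((j : Nat) : Int) ∈ PySem.Set.ofList c := by
      rw [pvCanonical] at hcan
      rw [hcan]
      exact List.mem_map.mpr ⟨j, List.mem_range.mpr hj, rfl⟩
    exact (PySem.Set.mem_ofList _ _).mp this
  have hhead : ∀ j : Nat, j < K →
      PySem.List.pyGetD (((pvEnum c).filter (fun q => q.1 == ((j : Nat) : Int))).map (fun q => q.2)) 0 0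
        = ((c.idxOf ((j : Nat) : Int) : Nat) : Int) := by
    intro j hj
    obtain ⟨t, ht⟩ := pvEnum_filter_head c _ (hmemc j hj)
    rw [ht, pvPyGetD_zero]
  have hTpair : ((List.range K).map
      (fun j => ((pvEnum c).filter (fun q => q.1 == ((j : Nat) : Int))).map (fun q => q.2))).Pairwise
      (fun b1 b2 => PySem.List.pyGetD b1 0 0 < PySem.List.pyGetD b2 0 0) := by
    rw [List.pairwise_map, List.pairwise_iff_getElem]
    intro i j hi hj hij
    simp only [List.getElem_range]
    rw [hhead i (by simpa using hi), hhead j (by simpa using hj)]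
    have := pvCanonical_idxOf_mono c hcan i j hij (by simpa using hj)
    exact_mod_cast this
  -- every block of P is the class of its head's color
  have hcanon := hcan
  rw [pvCanonical] at hcanon
  have hblock : ∀ b ∈ P, ∀ v : Nat, v < n → ((v : Nat) : Int) ∈ b →
      b = ((pvEnum c).filter (fun q => q.1 == c.getD v 0)).map (fun q => q.2) := by
    intro b hb v hv hvb
    apply pvSortedEqOfMem _ _ (hinv.1 b hb).2.1 (by
      have := pvAB_pairwise c (c.getD v 0)
      exact this)
    intro x
    constructor
    · intro hxb
      obtain ⟨w, hw, rfl⟩ := (hinv.1 b hb).2.2 x hxb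
      have hcw : c.getD w 0 = c.getD v 0 := (hinv.2.2.2 w v hw hv).mp ⟨b, hb, hxb, hvb⟩
      refine (pvAB_mem c _ _).mpr ⟨w, by omega, rfl, ?_⟩
      rw [← List.getD_eq_getElem c 0 (by omega), hcw]
    · intro hx
      obtain ⟨w, hw, rfl, hcw⟩ := (pvAB_mem c _ _).mp hx
      have hwn : w < n := by omega
      have hcw' : c.getD w 0 = c.getD v 0 := by
        rw [List.getD_eq_getElem c 0 (by omega), hcw]
      obtain ⟨b2, hb2, hwb2, hvb2⟩ := (hinv.2.2.2 w v hwn hv).mpr hcw'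
      obtain ⟨i2, hi2, rfl⟩ := List.mem_iff_getElem.mp hb2
      obtain ⟨i1, hi1, rfl⟩ := List.mem_iff_getElem.mp hb
      have hii : i2 = i1 := by
        by_contra hne
        exact pvDisj_getElem P hinv.2.1 i2 i1 hi2 hi1 hne _ hvb2 hvb
      subst hii
      exact hwb2
  -- the explicit color index of a block
  set jdx : List Int → Nat := fun b => (c.getD ((PySem.List.pyGetD b 0 0).toNat) 0).toNat with hjdx
  have hjdx_spec : ∀ b ∈ P, jdx b < K ∧
      b = ((pvEnum c).filter (fun q => q.1 == ((jdx b : Nat) : Int))).map (fun q => q.2) := by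
    intro b hb
    obtain ⟨x, t, rfl⟩ := List.exists_cons_of_ne_nil (hinv.1 _ hb).1
    obtain ⟨v, hv, rfl⟩ := (hinv.1 _ hb).2.2 x (by simp)
    have hget : PySem.List.pyGetD (((v : Nat) : Int) :: t) 0 0 = ((v : Nat) : Int) := pvPyGetD_zero _ _
    have hcv : c.getD v 0 ∈ PySem.Set.ofList c := by
      refine (PySem.Set.mem_ofList _ _).mpr ?_
      exact pvGetD_mem c v (by omega)
    rw [hcanon] at hcv
    obtain ⟨j, hj, hje⟩ := List.mem_map.mp hcv
    have hjK : j < K := List.mem_range.mp hj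
    have hjdxval : jdx (((v : Nat) : Int) :: t) = j := by
      rw [hjdx]
      dsimp only
      rw [hget]
      simp only [Int.toNat_natCast]
      rw [← hje]
      simp
    refine ⟨by rw [hjdxval]; exact hjK, ?_⟩
    rw [hjdxval, hje]
    exact hblock _ hb v hv (by simp)
  have hPeq : P = (P.map jdx).map
      (fun j => ((pvEnum c).filter (fun q => q.1 == ((j : Nat) : Int))).map (fun q => q.2)) := by
    rw [List.map_map]
    conv_lhs => rw [← List.map_id P]
    apply List.map_congr_left
    intro b hb
    exact (hjdx_spec b hb).2
  have hjperm : (P.map jdx).Perm (List.range K) := by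
    refine (List.perm_ext_iff_of_nodup ?_ List.nodup_range).mpr ?_
    · have hpw : (P.map jdx).Pairwise (· ≠ ·) := by
        rw [List.pairwise_map, List.pairwise_iff_getElem]
        intro i j hi hj hij heq
        have hbi := hjdx_spec P[i] (List.getElem_mem hi)
        have hbj := hjdx_spec P[j] (List.getElem_mem hj)
        have hPij : P[i] = P[j] := by rw [hbi.2, hbj.2, heq]
        obtain ⟨x, hx⟩ := List.exists_mem_of_ne_nil _ (hinv.1 _ (List.getElem_mem hi)).1
        exact pvDisj_getElem P hinv.2.1 i j hi hj (by omega) x hx (hPij ▸ hx)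
      exact hpw
    · intro j
      simp only [List.mem_map, List.mem_range]
      constructor
      · rintro ⟨b, hb, rfl⟩
        exact (hjdx_spec b hb).1
      · intro hj
        have hjc := hmemc j hj
        set w := c.idxOf ((j : Nat) : Int) with hw
        have hwlt : w < c.length := List.idxOf_lt_length_iff.mpr hjc
        have hwn : w < n := by omega
        obtain ⟨b, hb, hwb⟩ := hinv.2.2.1 w hwn
        refine ⟨b, hb, ?_⟩
        have hbeq := (hjdx_spec b hb).2
        have hmem2 : ((w : Nat) : Int)
            ∈ ((pvEnum c).filter (fun q => q.1 == ((jdx b : Nat) : Int))).map (fun q => q.2) :=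
          hbeq ▸ hwb
        obtain ⟨w', hw', he, hcw⟩ := (pvAB_mem c _ _).mp hmem2
        have hcw2 : c.getD w' 0 = ((jdx b : Nat) : Int) := by
          rw [List.getD_eq_getElem c 0 hw']
          exact hcw
        have hcwj2 : c.getD w 0 = ((j : Nat) : Int) := by
          rw [List.getD_eq_getElem c 0 hwlt]
          exact List.getElem_idxOf hwlt
        have hww : w' = w := by exact_mod_cast he.symm
        rw [hww] at hcw2
        have : ((jdx b : Nat) : Int) = ((j : Nat) : Int) := by rw [← hcw2, hcwj2]
        exact_mod_cast this
  have hTperm : ((List.range K).map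
      (fun j => ((pvEnum c).filter (fun q => q.1 == ((j : Nat) : Int))).map (fun q => q.2))).Perm P := by
    conv_rhs => rw [hPeq]
    exact (hjperm.symm).map _
  rw [PySem.List.sorted_eq_of_perm_of_pairwise_lt P _ (fun block => PySem.List.pyGetD block 0 0)
    hTperm hTpair]

-- ---- initialisation ----

def pvC0 (adjacency : List (List Bool)) (initial_keys : Option (List Int)) : List Int :=
  match initial_keys with
  | none => pvInitColors adjacency
  | some ks => pvRelabel ks

theorem pvGroupPart_inv (keys : List Int) :
    pvInv keys.length keys
      ((PySem.Set.ofList keys).map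
        (fun s => ((pvEnum keys).filter (fun q => q.1 == s)).map (fun q => q.2))) := by
  refine ⟨?_, ?_, ?_, ?_⟩
  · intro b hb
    obtain ⟨s, hs, rfl⟩ := List.mem_map.mp hb
    have hsk : s ∈ keys := (PySem.Set.mem_ofList _ _).mp hs
    obtain ⟨w, hw, hkw⟩ := List.mem_iff_getElem.mp hsk
    refine ⟨List.ne_nil_of_mem ((pvAB_mem keys s _).mpr ⟨w, hw, rfl, hkw⟩), pvAB_pairwise keys s, ?_⟩
    intro x hx
    obtain ⟨w', hw', rfl, _⟩ := (pvAB_mem keys s x).mp hx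
    exact ⟨w', hw', rfl⟩
  · rw [pvDisj, List.pairwise_map]
    refine List.Pairwise.imp ?_ (PySem.Set.nodup_ofList keys)
    intro s1 s2 hne x hx1 hx2
    obtain ⟨w1, hw1, rfl, hk1⟩ := (pvAB_mem keys s1 x).mp hx1
    obtain ⟨w2, hw2, he2, hk2⟩ := (pvAB_mem keys s2 _).mp hx2
    have : w2 = w1 := by exact_mod_cast he2.symm
    subst this
    exact hne (hk1 ▸ hk2 ▸ rfl)
  · intro v hv
    refine ⟨((pvEnum keys).filter (fun q => q.1 == keys[v])).map (fun q => q.2),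
      List.mem_map.mpr ⟨keys[v], (PySem.Set.mem_ofList _ _).mpr (List.getElem_mem hv), rfl⟩, ?_⟩
    exact (pvAB_mem keys _ _).mpr ⟨v, hv, rfl, rfl⟩
  · intro u v hu hv
    constructor
    · rintro ⟨b, hb, hub, hvb⟩
      obtain ⟨s, hs, rfl⟩ := List.mem_map.mp hb
      obtain ⟨w1, hw1, he1, hk1⟩ := (pvAB_mem keys s _).mp hub
      obtain ⟨w2, hw2, he2, hk2⟩ := (pvAB_mem keys s _).mp hvb
      have hwu : w1 = u := by exact_mod_cast he1.symm
      have hwv : w2 = v := by exact_mod_cast he2.symm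
      subst hwu; subst hwv
      rw [List.getD_eq_getElem keys 0 hu, List.getD_eq_getElem keys 0 hv, hk1, hk2]
    · intro hkuv
      rw [List.getD_eq_getElem keys 0 hu, List.getD_eq_getElem keys 0 hv] at hkuv
      refine ⟨((pvEnum keys).filter (fun q => q.1 == keys[u])).map (fun q => q.2),
        List.mem_map.mpr ⟨keys[u], (PySem.Set.mem_ofList _ _).mpr (List.getElem_mem hu), rfl⟩, ?_, ?_⟩
      · exact (pvAB_mem keys _ _).mpr ⟨u, hu, rfl, rfl⟩
      · exact (pvAB_mem keys _ _).mpr ⟨v, hv, rfl, hkuv.symm⟩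

theorem pvInv_pattern (n : Nat) (c d : List Int) (P : List (List Int)) (hinv : pvInv n c P)
    (hpat : ∀ u v : Nat, u < n → v < n → (c.getD u 0 = c.getD v 0 ↔ d.getD u 0 = d.getD v 0)) :
    pvInv n d P :=
  ⟨hinv.1, hinv.2.1, hinv.2.2.1, fun u v hu hv => (hinv.2.2.2 u v hu hv).trans (hpat u v hu hv)⟩

theorem pvInit_inv (adjacency : List (List Bool)) (initial_keys : Option (List Int))
    (hpre : Pre_refined_color_classes_py adjacency initial_keys) :
    pvInv adjacency.length (pvC0 adjacency initial_keys)
      (pvInitPartB (pvKeysB adjacency initial_keys)) := by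
  set n := adjacency.length with hn
  have hklen : (pvKeysB adjacency initial_keys).length = n := by
    cases initial_keys with
    | none => simp [pvKeysB, pvInitColors]; omega
    | some ks =>
      have hle : n ≤ ks.length := hpre.2 ks rfl
      rw [pvKeysB]
      rw [PySem.List.slice_to_natCast]
      rw [List.length_take]
      omega
  have hP : pvInitPartB (pvKeysB adjacency initial_keys)
      = (PySem.Set.ofList (pvKeysB adjacency initial_keys)).map
          (fun s => ((pvEnum (pvKeysB adjacency initial_keys)).filter (fun q => q.1 == s)).map (fun q => q.2)) := by
    rw [pvInitPartB, pvGroupPairs_values, pvEnum_fst]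
  have hbase := pvGroupPart_inv (pvKeysB adjacency initial_keys)
  rw [hklen] at hbase
  rw [hP]
  refine pvInv_pattern n _ _ _ hbase ?_
  intro u v hu hv
  cases initial_keys with
  | none => exact Iff.rfl
  | some ks =>
    have hle : n ≤ ks.length := hpre.2 ks rfl
    have hgetk : ∀ w : Nat, w < n → (pvKeysB adjacency (some ks)).getD w 0 = ks.getD w 0 := by
      intro w hw
      rw [pvKeysB, PySem.List.slice_to_natCast]
      rw [List.getD_eq_getElem _ 0 (by rw [List.length_take]; omega),
        List.getD_eq_getElem _ 0 (by omega), List.getElem_take]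
    have hgetc : ∀ w : Nat, w < n → (pvC0 adjacency (some ks)).getD w 0 = pvG ks (ks.getD w 0) := by
      intro w hw
      show (pvRelabel ks).getD w 0 = _
      rw [pvRelabel_spec]
      exact pvGetD_map (pvG ks) ks w (by omega)
    rw [hgetk u hu, hgetk v hv, hgetc u hu, hgetc v hv]
    constructor
    · intro h; rw [h]
    · intro h
      exact pvG_inj (pvGetD_mem ks u (by omega)) (pvGetD_mem ks v (by omega)) h

-- ===== VERDICT (by name: the statement is the Claim_ definition above) =====
theorem refined_color_classes_py_spec : Claim_equal_refined_color_classes_py := by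
  unfold Claim_equal_refined_color_classes_py
  intro adjacency initial_keys _ hpre
  unfold Spec_refined_color_classes_py
  have hinv0 := pvInit_inv adjacency initial_keys hpre
  set n := adjacency.length with hn
  set c0 : List Int := pvC0 adjacency initial_keys with hc0
  have hmain := pvMain adjacency n (n + 3) c0 (pvInitPartB (pvKeysB adjacency initial_keys)) hinv0
  have hcan : pvCanonical (pvALoop adjacency n (n + 3) c0) :=
    pvALoop_canonical adjacency n (n + 3) c0 (Or.inl (by omega))
  have hlen : (pvALoop adjacency n (n + 3) c0).length = n :=
    pvALoop_length adjacency n (n + 3) c0 (by omega)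
  show pvExtractA (pvALoop adjacency n (n+3) c0) = _
  exact pvFinal adjacency n _ _ hlen hcan hmain
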